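-- pv_equiv track=rewrite | github.com/River-Mt/Algorithm | 백준/Gold/20058. 마법사 상어와 파이어스톰/마법사 상어와 파이어스톰.py | find_dummy
-- ===== SOURCE A (Python) =====
-- import collections
--
-- def bfs(MAP, sx, sy):
--     move = {(-1, 0), (0, 1), (1, 0), (0, -1)}
--     q = collections.deque()
--     q.append((sx, sy))
--     total = MAP[sx][sy]
--     MAP[sx][sy] = -1
--     cnt = 1
--
--     while q:
--         cx, cy = q.popleft()
--
--         for tx, ty in move:
--             nx = tx + cx
--             ny = ty + cy
--
--             if 0 <= nx < len(MAP) and 0 <= ny < len(MAP[0]) and MAP[nx][ny] > 0: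
--                 q.append((nx, ny))
--                 total += MAP[nx][ny]
--                 MAP[nx][ny] = -1
--                 cnt += 1
--
--     return total, cnt
--
-- def find_dummy(MAP):
--     total = 0
--     max_island = 0
--
--     for i in range(len(MAP)):
--         for j in range(len(MAP[0])):
--             if MAP[i][j] > 0:
--                 total_ice, island_cnt = bfs(MAP, i, j)
--                 max_island = max(max_island, island_cnt)
--                 total += total_ice
--
--     return total, max_island
-- ===== SOURCE B (Python) =====
-- # Weighted quick-find union-find in one row-major pass (labels merged via the
-- # smaller class's member list) instead of per-component BFS flood fill; B does
-- # NOT mutate MAP (A overwrites positive cells with -1): the equivalence is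
-- # about the return value only.
-- def find_dummy(MAP):
--     rows = len(MAP)
--     cols = len(MAP[0]) if rows else 0
--     total = 0
--     label = {}    # positive cell -> label of its component so far
--     members = {}  # label -> the cells currently carrying that label
--     for i in range(rows):
--         for j in range(cols):
--             v = MAP[i][j]
--             if v <= 0:
--                 continue
--             total += v
--             label[(i, j)] = (i, j)
--             members[(i, j)] = [(i, j)]
--             for nb in ((i - 1, j), (i, j - 1)):
--                 if nb in label and label[nb] != label[(i, j)]:
--                     a, b = label[(i, j)], label[nb]
--                     if len(members[a]) > len(members[b]):
--                         a, b = b, a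
--                     for c in members[a]:
--                         label[c] = b
--                     members[b].extend(members.pop(a))
--     best = max(map(len, members.values()), default=0)
--     return total, best
-- ===== Notes on version B (the rewrite author's own statement) =====
-- stated objective: alternative
-- what changed: Replaces the per-component BFS flood fill (deque, cells overwritten with -1, visited-by-mutation) with a single row-major union-find pass: each positive cell is united with its already-seen up/left neighbours by weighted quick-find (the smaller class's member list is relabelled), and the answer is the grand total plus the largest class size; B does not mutate MAP.
import Mathlib
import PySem

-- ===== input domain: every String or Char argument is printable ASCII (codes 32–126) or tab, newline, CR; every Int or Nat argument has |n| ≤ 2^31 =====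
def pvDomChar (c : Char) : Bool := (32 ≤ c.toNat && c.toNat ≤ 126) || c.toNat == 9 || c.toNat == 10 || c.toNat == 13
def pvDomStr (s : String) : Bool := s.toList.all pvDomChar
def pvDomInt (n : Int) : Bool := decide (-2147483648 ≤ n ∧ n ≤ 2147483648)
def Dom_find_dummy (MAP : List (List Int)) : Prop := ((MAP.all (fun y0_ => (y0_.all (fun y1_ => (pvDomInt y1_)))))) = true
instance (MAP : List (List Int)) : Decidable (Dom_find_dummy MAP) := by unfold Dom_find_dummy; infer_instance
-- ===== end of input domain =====

-- B replaces A's per-component BFS flood fill (deque + cells overwritten with -1) by a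
-- single row-major union-find pass (weighted quick-find: labels merged by relabelling the
-- smaller class's member list); A mutates MAP in place while B does not — the equivalence
-- proved is about the return value only.


-- ===== PORT A =====
-- MAP[i][j] (read only where Python reads: nonnegative, in-range indices)
def pvGGet (g : List (List Int)) (i j : Int) : Int :=
  (PySem.List.pyGet? ((PySem.List.pyGet? g i).getD []) j).getD 0

-- MAP[i][j] = v  (functional update; A mutates in place)
def pvGSet (g : List (List Int)) (i j : Int) (v : Int) : List (List Int) :=
  g.set i.toNat ((g.getD i.toNat []).set j.toNat v)

-- len(MAP[0])
def pvCols (g : List (List Int)) : Int :=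
  PySem.List.len ((PySem.List.pyGet? g 0).getD [])

-- move = {(-1,0),(0,1),(1,0),(0,-1)}: a Python set, whose iteration order is not
-- modelled; the bfs result (total, cnt, final MAP) is order-independent, so a fixed order is exact
def pvMoves : List (Int × Int) := [(-1,0),(0,1),(1,0),(0,-1)]

-- the `while q:` loop of bfs; fuel is a totality guard only (the caller passes enough)
def pvBfsLoop : Nat → List (List Int) → List (Int × Int) → Int → Int →
    List (List Int) × Int × Int
  | 0, g, _, total, cnt => (g, total, cnt)
  | _ + 1, g, [], total, cnt => (g, total, cnt)
  | f + 1, g, c :: qr, total, cnt =>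
      let st := pvMoves.foldl (fun (st : List (List Int) × List (Int × Int) × Int × Int) tv =>
        if 0 ≤ tv.1 + c.1 ∧ tv.1 + c.1 < PySem.List.len st.1 ∧ 0 ≤ tv.2 + c.2 ∧
            tv.2 + c.2 < pvCols st.1 ∧ pvGGet st.1 (tv.1 + c.1) (tv.2 + c.2) > 0 then
          (pvGSet st.1 (tv.1 + c.1) (tv.2 + c.2) (-1), st.2.1 ++ [(tv.1 + c.1, tv.2 + c.2)],
           st.2.2.1 + pvGGet st.1 (tv.1 + c.1) (tv.2 + c.2), st.2.2.2 + 1)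
        else st) (g, qr, total, cnt)
      pvBfsLoop f st.1 st.2.1 st.2.2.1 st.2.2.2

def pvBfs (g : List (List Int)) (sx sy : Int) : List (List Int) × Int × Int :=
  let total := pvGGet g sx sy
  let g' := pvGSet g sx sy (-1)
  pvBfsLoop (5 * g.length * ((PySem.List.pyGet? g 0).getD []).length + 5) g' [(sx, sy)] total 1

def find_dummy (MAP : List (List Int)) : Int × Int :=
  let st := (PySem.List.pyRange 0 (PySem.List.len MAP) 1).foldl
    (fun (st : List (List Int) × Int × Int) i =>
      (PySem.List.pyRange 0 (pvCols st.1) 1).foldl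
        (fun (st : List (List Int) × Int × Int) j =>
          if pvGGet st.1 i j > 0 then
            let r := pvBfs st.1 i j
            (r.1, st.2.1 + r.2.1, max st.2.2 r.2.2)
          else st) st) (MAP, 0, 0)
  (st.2.1, st.2.2)

-- ===== PORT B =====
-- the body of `if nb in label and label[nb] != label[(i,j)]: …` (one neighbour merge);
-- `label[(i,j)]` / `members[a]` are ported with getD whose default is never used: the key
-- is always present at that point in the Python, so the port is exact
def pvUnion (lm : PySem.Dict (Int × Int) (Int × Int) × PySem.Dict (Int × Int) (List (Int × Int)))
    (c nb : Int × Int) :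
    PySem.Dict (Int × Int) (Int × Int) × PySem.Dict (Int × Int) (List (Int × Int)) :=
  match PySem.Dict.get? lm.1 nb with
  | none => lm
  | some lnb =>
    let lc := (PySem.Dict.get? lm.1 c).getD c
    if lnb = lc then lm
    else
      let p := if (PySem.Dict.getD lm.2 lc []).length > (PySem.Dict.getD lm.2 lnb []).length
               then (lnb, lc) else (lc, lnb)
      let ma := PySem.Dict.getD lm.2 p.1 []
      let label' := ma.foldl (fun L x => PySem.Dict.insert L x p.2) lm.1
      let members' := PySem.Dict.modify (PySem.Dict.erase lm.2 p.1) p.2 [] (· ++ ma)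
      (label', members')

def find_dummy_alt (MAP : List (List Int)) : Int × Int :=
  let rows := PySem.List.len MAP
  let cols := if rows = 0 then 0 else PySem.List.len ((PySem.List.pyGet? MAP 0).getD [])
  let st := (PySem.List.pyRange 0 rows 1).foldl
    (fun (st : Int × PySem.Dict (Int × Int) (Int × Int) × PySem.Dict (Int × Int) (List (Int × Int))) i =>
      (PySem.List.pyRange 0 cols 1).foldl
        (fun (st : Int × PySem.Dict (Int × Int) (Int × Int) × PySem.Dict (Int × Int) (List (Int × Int))) j =>
          let v := pvGGet MAP i j
          if v ≤ 0 then st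
          else
            let total := st.1 + v
            let label := PySem.Dict.insert st.2.1 (i, j) (i, j)
            let members := PySem.Dict.insert st.2.2 (i, j) [(i, j)]
            let lm := [(i - 1, j), (i, j - 1)].foldl (fun lm nb => pvUnion lm (i, j) nb)
              (label, members)
            (total, lm)) st) (0, PySem.Dict.empty, PySem.Dict.empty)
  (st.1, PySem.List.maxD ((PySem.Dict.values st.2.2).map (fun m => PySem.List.len m))
    (fun x => x) 0)

-- ===== PRECONDITION & SPEC =====
-- Pre_ excludes exactly the inputs where Python A raises IndexError: grids where some
-- row is shorter than row 0 (A reads MAP[i][j] for every j < len(MAP[0])).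
def Pre_find_dummy (MAP : List (List Int)) : Prop :=
  ∀ row ∈ MAP, (MAP.headD []).length ≤ row.length
instance (MAP : List (List Int)) : Decidable (Pre_find_dummy MAP) := by
  unfold Pre_find_dummy; infer_instance
def pvWitness_find_dummy : List (List Int) := [[1, -1], [0, 2]]
def Spec_find_dummy (MAP : List (List Int)) (out : Int × Int) : Prop := out = find_dummy_alt MAP
instance (MAP : List (List Int)) (out : Int × Int) : Decidable (Spec_find_dummy MAP out) := by
  unfold Spec_find_dummy; infer_instance

-- ===== CLAIM (what is proved, stated in full; the proofs are below) =====
def Claim_equal_find_dummy : Prop := ∀ (MAP : List (List Int)), Dom_find_dummy MAP → Pre_find_dummy MAP → Spec_find_dummy MAP (find_dummy MAP)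

-- ===== LEMMAS AND PROOFS =====

-- value of the original grid at a cell
def pvVal (g0 : List (List Int)) (c : Int × Int) : Int := pvGGet g0 c.1 c.2

-- c is an in-range positive cell of g0 (range = rows × len(row 0))
def pvPos (g0 : List (List Int)) (c : Int × Int) : Prop :=
  0 ≤ c.1 ∧ c.1 < (g0.length : Int) ∧ 0 ≤ c.2 ∧ c.2 < ((g0.headD []).length : Int) ∧
    0 < pvVal g0 c

-- the positive cells, as a Finset
noncomputable def pvP (g0 : List (List Int)) : Finset (Int × Int) :=
  (Finset.Icc ((0 : Int), (0 : Int)) ((g0.length : Int) - 1, ((g0.headD []).length : Int) - 1)).filter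
    (fun c => 0 < pvVal g0 c)

def pvNbrs (c : Int × Int) : List (Int × Int) :=
  [(c.1 - 1, c.2), (c.1, c.2 + 1), (c.1 + 1, c.2), (c.1, c.2 - 1)]

def pvAdj (g0 : List (List Int)) (c d : Int × Int) : Prop :=
  pvPos g0 c ∧ pvPos g0 d ∧ d ∈ pvNbrs c

def pvReach (g0 : List (List Int)) (c d : Int × Int) : Prop :=
  Relation.ReflTransGen (pvAdj g0) c d

noncomputable def pvComp (g0 : List (List Int)) (s : Int × Int) : Finset (Int × Int) :=
  @Finset.filter _ (fun d => pvReach g0 s d) (fun _ => Classical.propDecidable _) (pvP g0)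

def pvClosed (g0 : List (List Int)) (V : Finset (Int × Int)) : Prop :=
  ∀ a ∈ V, ∀ b, pvAdj g0 a b → b ∈ V

-- A's current grid is the original with exactly the cells of V overwritten by -1
def pvGInv (g0 : List (List Int)) (V : Finset (Int × Int)) (g : List (List Int)) : Prop :=
  g.length = g0.length ∧
  (∀ k : Nat, (g.getD k []).length = (g0.getD k []).length) ∧
  (∀ i j : Int, 0 ≤ i → 0 ≤ j →
    pvGGet g i j = if (i, j) ∈ V then -1 else pvGGet g0 i j)

-- the common value both programs compute: total ice and largest component size
noncomputable def pvTarget (g0 : List (List Int)) : Int × Int :=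
  ((pvP g0).sum (pvVal g0), (((pvP g0).sup (fun c => (pvComp g0 c).card) : Nat) : Int))

lemma pv_mem_pvP (g0 : List (List Int)) (c : Int × Int) : c ∈ pvP g0 ↔ pvPos g0 c := by
  rcases c with ⟨c1, c2⟩
  simp only [pvP, Finset.mem_filter, Finset.mem_Icc, Prod.mk_le_mk, pvPos]
  constructor
  · rintro ⟨⟨⟨h1, h3⟩, h2, h4⟩, h5⟩; exact ⟨h1, by omega, h3, by omega, h5⟩
  · rintro ⟨h1, h2, h3, h4, h5⟩; exact ⟨⟨⟨h1, h3⟩, by omega, by omega⟩, h5⟩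

lemma pvNbrs_symm (c d : Int × Int) : d ∈ pvNbrs c ↔ c ∈ pvNbrs d := by
  rcases c with ⟨c1, c2⟩; rcases d with ⟨d1, d2⟩
  simp only [pvNbrs, List.mem_cons, Prod.mk.injEq, List.not_mem_nil, or_false]
  omega

lemma pvAdj_symm (g0 : List (List Int)) {c d : Int × Int} (h : pvAdj g0 c d) : pvAdj g0 d c := by
  obtain ⟨hc, hd, hm⟩ := h
  exact ⟨hd, hc, (pvNbrs_symm d c).mpr hm⟩

lemma pvReach_symm (g0 : List (List Int)) {c d : Int × Int} (h : pvReach g0 c d) :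
    pvReach g0 d c := by
  induction h with
  | refl => exact Relation.ReflTransGen.refl
  | tail _ hstep ih =>
      exact Relation.ReflTransGen.trans (Relation.ReflTransGen.single (pvAdj_symm g0 hstep)) ih

lemma pvClosed_reach (g0 : List (List Int)) {V : Finset (Int × Int)} (hV : pvClosed g0 V)
    {a b : Int × Int} (ha : a ∈ V) (h : pvReach g0 a b) : b ∈ V := by
  induction h with
  | refl => exact ha
  | tail _ hstep ih => exact hV _ ih _ hstep

lemma pv_mem_comp_self (g0 : List (List Int)) {s : Int × Int} (hs : s ∈ pvP g0) :
    s ∈ pvComp g0 s := by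
  simp only [pvComp, Finset.mem_filter]
  exact ⟨hs, Relation.ReflTransGen.refl⟩

lemma pvComp_subset_P (g0 : List (List Int)) (s : Int × Int) : pvComp g0 s ⊆ pvP g0 := by
  intro d hd
  simp only [pvComp, Finset.mem_filter] at hd
  exact hd.1

lemma pvComp_closed (g0 : List (List Int)) (s : Int × Int) : pvClosed g0 (pvComp g0 s) := by
  intro a ha b hab
  simp only [pvComp, Finset.mem_filter] at ha ⊢
  exact ⟨(pv_mem_pvP g0 b).mpr hab.2.1, ha.2.trans (Relation.ReflTransGen.single hab)⟩

lemma pvComp_disjoint (g0 : List (List Int)) {V : Finset (Int × Int)} (hV : pvClosed g0 V)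
    {s : Int × Int} (hs : s ∉ V) : Disjoint V (pvComp g0 s) := by
  rw [Finset.disjoint_right]
  intro d hd hdV
  simp only [pvComp, Finset.mem_filter] at hd
  exact hs (pvClosed_reach g0 hV hdV (pvReach_symm g0 hd.2))

lemma pvComp_subset_closed (g0 : List (List Int)) {W : Finset (Int × Int)}
    (hW : pvClosed g0 W) {s : Int × Int} (hs : s ∈ W) : pvComp g0 s ⊆ W := by
  intro d hd
  simp only [pvComp, Finset.mem_filter] at hd
  exact pvClosed_reach g0 hW hs hd.2

lemma pvComp_eq_of_mem (g0 : List (List Int)) {c d : Int × Int} (h : c ∈ pvComp g0 d) :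
    pvComp g0 c = pvComp g0 d := by
  simp only [pvComp, Finset.mem_filter] at h
  apply Finset.ext
  intro x
  simp only [pvComp, Finset.mem_filter]
  constructor
  · rintro ⟨hx, hr⟩; exact ⟨hx, h.2.trans hr⟩
  · rintro ⟨hx, hr⟩; exact ⟨hx, (pvReach_symm g0 h.2).trans hr⟩

lemma pvHead_eq (g : List (List Int)) : (PySem.List.pyGet? g 0).getD [] = g.headD [] := by
  cases g <;> simp [PySem.List.pyGet?_zero]

lemma pvGGet_eq_getD (g : List (List Int)) {i j : Int} (hi : 0 ≤ i) (hj : 0 ≤ j) :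
    pvGGet g i j = (g.getD i.toNat []).getD j.toNat 0 := by
  simp [pvGGet, PySem.List.pyGet?_of_nonneg _ hi, PySem.List.pyGet?_of_nonneg _ hj,
    List.getD_eq_getElem?_getD]

lemma pvPos_row_lt (g0 : List (List Int)) {c : Int × Int} (hc : pvPos g0 c) :
    c.2.toNat < (g0.getD c.1.toNat []).length := by
  obtain ⟨h1, h2, h3, h4, h5⟩ := hc
  rw [pvVal, pvGGet_eq_getD g0 h1 h3] at h5
  by_contra hlt
  rw [List.getD_eq_getElem?_getD, List.getElem?_eq_none (by omega)] at h5
  simp at h5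

lemma pvGSet_length (g : List (List Int)) (i j v : Int) :
    (pvGSet g i j v).length = g.length := by
  simp [pvGSet]

lemma pvGSet_row_length (g : List (List Int)) (i j v : Int) (k : Nat) :
    ((pvGSet g i j v).getD k []).length = (g.getD k []).length := by
  by_cases hk : k = i.toNat
  · subst hk
    by_cases hlt : i.toNat < g.length
    · simp [pvGSet, List.getD_eq_getElem?_getD, hlt]
    · rw [pvGSet, List.getD_eq_getElem?_getD, List.getD_eq_getElem?_getD,
        List.getElem?_eq_none (l := g.set i.toNat _) (by simpa using (by omega : g.length ≤ i.toNat)),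
        List.getElem?_eq_none (l := g) (by omega)]
  · have hk' : ¬ i.toNat = k := fun h => hk h.symm
    simp [pvGSet, List.getD_eq_getElem?_getD, hk']

lemma pvGGet_pvGSet (g : List (List Int)) {i j : Int} (v : Int) (hi : 0 ≤ i) (hj : 0 ≤ j)
    (hil : i < (g.length : Int)) (hjl : j < ((g.getD i.toNat []).length : Int))
    (a b : Int) (ha : 0 ≤ a) (hb : 0 ≤ b) :
    pvGGet (pvGSet g i j v) a b = if a = i ∧ b = j then v else pvGGet g a b := by
  have hgl : i.toNat < g.length := by omega
  have hrl : j.toNat < (g.getD i.toNat []).length := by omega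
  rw [pvGGet_eq_getD _ ha hb, pvGGet_eq_getD _ ha hb]
  by_cases hai : a = i
  · subst hai
    have : (pvGSet g a j v).getD a.toNat [] = (g.getD a.toNat []).set j.toNat v := by
      simp [pvGSet, hgl]
    rw [this]
    have hrl2 : j.toNat < (g[a.toNat]?.getD ([] : List Int)).length := by
      rw [← List.getD_eq_getElem?_getD]; exact by omega
    by_cases hbj : b = j
    · subst hbj
      simp [List.getD_eq_getElem?_getD, hrl2]
    · have hne2 : ¬ j.toNat = b.toNat := by omega
      simp [List.getD_eq_getElem?_getD, hne2, hbj]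
  · have hne : ¬ i.toNat = a.toNat := by omega
    have : (pvGSet g i j v).getD a.toNat [] = g.getD a.toNat [] := by
      simp [pvGSet, List.getD_eq_getElem?_getD, hne]
    rw [this]
    simp [hai]

lemma pvGInv_init (g0 : List (List Int)) : pvGInv g0 (∅ : Finset (Int × Int)) g0 := by
  refine ⟨rfl, fun _ => rfl, ?_⟩
  intro i j _ _
  simp

lemma pvGInv_cols (g0 : List (List Int)) {V : Finset (Int × Int)} {g : List (List Int)}
    (h : pvGInv g0 V g) :
    pvCols g = ((g0.headD []).length : Int) ∧ PySem.List.len g = (g0.length : Int) ∧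
      ((PySem.List.pyGet? g 0).getD []).length = (g0.headD []).length := by
  obtain ⟨h1, h2, _⟩ := h
  have hg0 : ((PySem.List.pyGet? g 0).getD []).length = (g0.headD []).length := by
    rw [pvHead_eq]
    have hh : ∀ (l : List (List Int)), l.headD [] = l.getD 0 [] := by
      intro l; cases l <;> simp
    rw [hh g, hh g0]
    exact h2 0
  refine ⟨?_, ?_, hg0⟩
  · rw [pvCols, PySem.List.len_eq, hg0]
  · rw [PySem.List.len_eq, h1]

lemma pvGInv_set (g0 : List (List Int)) {V : Finset (Int × Int)} {g : List (List Int)}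
    (h : pvGInv g0 V g) {c : Int × Int} (hc : pvPos g0 c) :
    pvGInv g0 (insert c V) (pvGSet g c.1 c.2 (-1)) := by
  obtain ⟨h1, h2, h3⟩ := h
  have hc1 : 0 ≤ c.1 := hc.1
  have hc2 : 0 ≤ c.2 := hc.2.2.1
  have hil : c.1 < (g.length : Int) := by rw [h1]; exact hc.2.1
  have hjl : c.2 < ((g.getD c.1.toNat []).length : Int) := by
    have := pvPos_row_lt g0 hc
    have := h2 c.1.toNat
    omega
  refine ⟨by rw [pvGSet_length, h1], fun k => by rw [pvGSet_row_length]; exact h2 k, ?_⟩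
  intro i j hi hj
  rw [pvGGet_pvGSet g (-1) hc1 hc2 hil hjl i j hi hj, h3 i j hi hj]
  rcases c with ⟨x, y⟩
  by_cases hij : (i, j) = (x, y)
  · simp_all
  · have : ¬(i = x ∧ j = y) := by simpa [Prod.ext_iff] using hij
    simp [this, hij]

lemma pvGuardA (g0 : List (List Int)) {V : Finset (Int × Int)} {g : List (List Int)}
    (h : pvGInv g0 V g) (_hVP : V ⊆ pvP g0) (bx by' : Int) :
    (0 ≤ bx ∧ bx < PySem.List.len g ∧ 0 ≤ by' ∧ by' < pvCols g ∧
      pvGGet g bx by' > 0) ↔ (pvPos g0 (bx, by') ∧ (bx, by') ∉ V) := by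
  obtain ⟨hcols, hlen, _⟩ := pvGInv_cols g0 h
  have hg := h.2.2
  rw [hcols, hlen]
  constructor
  · rintro ⟨h1, h2, h3, h4, h5⟩
    have hbV : (bx, by') ∉ V := by
      intro hbV
      rw [hg bx by' h1 h3, if_pos hbV] at h5
      omega
    rw [hg bx by' h1 h3, if_neg hbV] at h5
    exact ⟨⟨h1, h2, h3, h4, h5⟩, hbV⟩
  · rintro ⟨⟨h1, h2, h3, h4, h5⟩, hbV⟩
    refine ⟨h1, h2, h3, h4, ?_⟩
    rw [hg bx by' h1 h3, if_neg hbV]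
    exact h5

lemma pvGGet_of_notMem (g0 : List (List Int)) {V : Finset (Int × Int)} {g : List (List Int)}
    (h : pvGInv g0 V g) (bx by' : Int) (hb1 : 0 ≤ bx) (hb2 : 0 ≤ by')
    (hbV : (bx, by') ∉ V) :
    pvGGet g bx by' = pvVal g0 (bx, by') := by
  rw [(h.2.2) bx by' hb1 hb2, if_neg hbV]
  rfl

lemma pvMoves_shift_nodup (c : Int × Int) :
    (pvMoves.map (fun tv => (tv.1 + c.1, tv.2 + c.2))).Nodup := by
  simp only [pvMoves, List.map_cons, List.map_nil]
  refine List.nodup_cons.mpr ⟨?_, List.nodup_cons.mpr ⟨?_, List.nodup_cons.mpr ⟨?_, List.nodup_singleton _⟩⟩⟩ <;>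
    simp [Prod.ext_iff]

lemma pvMoves_shift_mem (c : Int × Int) :
    ∀ tv ∈ pvMoves, (tv.1 + c.1, tv.2 + c.2) ∈ pvNbrs c := by
  intro tv htv
  rcases c with ⟨x, y⟩
  fin_cases htv <;> simp [pvNbrs] <;> omega

lemma pvNbrs_exists_move {b c : Int × Int} (h : b ∈ pvNbrs c) :
    ∃ tv ∈ pvMoves, (tv.1 + c.1, tv.2 + c.2) = b := by
  rcases c with ⟨x, y⟩
  simp only [pvNbrs, List.mem_cons, List.not_mem_nil, or_false] at h
  rcases h with h | h | h | h <;>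
    [exact ⟨(-1, 0), by simp [pvMoves], by rw [h, Prod.mk.injEq]; omega⟩;
     exact ⟨(0, 1), by simp [pvMoves], by rw [h, Prod.mk.injEq]; omega⟩;
     exact ⟨(1, 0), by simp [pvMoves], by rw [h, Prod.mk.injEq]; omega⟩;
     exact ⟨(0, -1), by simp [pvMoves], by rw [h, Prod.mk.injEq]; omega⟩]

lemma pvP_card_le (g0 : List (List Int)) :
    (pvP g0).card ≤ g0.length * (g0.headD []).length := by
  have h1 : (pvP g0).card ≤ (Finset.Icc ((0 : Int), (0 : Int))
      ((g0.length : Int) - 1, ((g0.headD []).length : Int) - 1)).card :=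
    Finset.card_filter_le _ _
  rw [← Finset.Icc_product_Icc, Finset.card_product, Int.card_Icc, Int.card_Icc] at h1
  calc (pvP g0).card ≤ _ := h1
    _ ≤ _ := by
        apply Nat.mul_le_mul <;> omega

lemma pvFoldA (g0 : List (List Int)) (c : Int × Int) (hc : pvPos g0 c) :
    ∀ (mvs : List (Int × Int)) (V : Finset (Int × Int)) (g : List (List Int))
      (q : List (Int × Int)) (total cnt : Int),
      pvGInv g0 V g → V ⊆ pvP g0 →
      (mvs.map (fun tv => (tv.1 + c.1, tv.2 + c.2))).Nodup →
      (∀ tv ∈ mvs, (tv.1 + c.1, tv.2 + c.2) ∈ pvNbrs c) →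
      ∃ news gN,
        mvs.foldl (fun (st : List (List Int) × List (Int × Int) × Int × Int) tv =>
          if 0 ≤ tv.1 + c.1 ∧ tv.1 + c.1 < PySem.List.len st.1 ∧ 0 ≤ tv.2 + c.2 ∧
              tv.2 + c.2 < pvCols st.1 ∧ pvGGet st.1 (tv.1 + c.1) (tv.2 + c.2) > 0 then
            (pvGSet st.1 (tv.1 + c.1) (tv.2 + c.2) (-1), st.2.1 ++ [(tv.1 + c.1, tv.2 + c.2)],
             st.2.2.1 + pvGGet st.1 (tv.1 + c.1) (tv.2 + c.2), st.2.2.2 + 1)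
          else st) (g, q, total, cnt)
        = (gN, q ++ news, total + (news.map (pvVal g0)).sum, cnt + news.length) ∧
        news.Nodup ∧
        (∀ b ∈ news, pvAdj g0 c b ∧ b ∉ V) ∧
        (∀ tv ∈ mvs, pvPos g0 (tv.1 + c.1, tv.2 + c.2) → (tv.1 + c.1, tv.2 + c.2) ∉ V →
          (tv.1 + c.1, tv.2 + c.2) ∈ news) ∧
        pvGInv g0 (V ∪ news.toFinset) gN := by
  intro mvs
  induction mvs with
  | nil =>
      intro V g q total cnt hG hVP _ _
      exact ⟨[], g, by simp, by simp, by simp, by simp, by simpa using hG⟩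
  | cons tv mvs' ih =>
      intro V g q total cnt hG hVP hnd hmem
      rw [List.map_cons, List.nodup_cons] at hnd
      have hguard := pvGuardA g0 hG hVP (tv.1 + c.1) (tv.2 + c.2)
      rw [List.foldl_cons]
      by_cases hcond : pvPos g0 (tv.1 + c.1, tv.2 + c.2) ∧ (tv.1 + c.1, tv.2 + c.2) ∉ V
      · rw [if_pos (hguard.mpr hcond),
          pvGGet_of_notMem g0 hG (tv.1 + c.1) (tv.2 + c.2) hcond.1.1 hcond.1.2.2.1 hcond.2]
        have hG' : pvGInv g0 (insert (tv.1 + c.1, tv.2 + c.2) V)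
            (pvGSet g (tv.1 + c.1) (tv.2 + c.2) (-1)) := pvGInv_set g0 hG hcond.1
        have hVP' : insert (tv.1 + c.1, tv.2 + c.2) V ⊆ pvP g0 := by
          intro x hx
          rcases Finset.mem_insert.mp hx with h | h
          · subst h; exact (pv_mem_pvP g0 _).mpr hcond.1
          · exact hVP h
        obtain ⟨news', gN, heq, hnd', hprops', hcover', hGN⟩ :=
          ih (insert (tv.1 + c.1, tv.2 + c.2) V) (pvGSet g (tv.1 + c.1) (tv.2 + c.2) (-1))
            (q ++ [(tv.1 + c.1, tv.2 + c.2)]) (total + pvVal g0 (tv.1 + c.1, tv.2 + c.2)) (cnt + 1)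
            hG' hVP' hnd.2 (fun tv' htv' => hmem tv' (List.mem_cons_of_mem _ htv'))
        refine ⟨(tv.1 + c.1, tv.2 + c.2) :: news', gN, ?_, ?_, ?_, ?_, ?_⟩
        · rw [heq]
          refine Prod.ext rfl (Prod.ext ?_ (Prod.ext ?_ ?_)) <;> dsimp
          · rw [List.append_assoc]; rfl
          · ring
          · ring
        · refine List.nodup_cons.mpr ⟨?_, hnd'⟩
          intro hmem'
          exact ((hprops' _ hmem').2) (Finset.mem_insert_self _ _)
        · intro b hb
          rcases List.mem_cons.mp hb with h | h
          · subst h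
            exact ⟨⟨hc, hcond.1, hmem tv List.mem_cons_self⟩, hcond.2⟩
          · have := hprops' b h
            exact ⟨this.1, fun hbV => this.2 (Finset.mem_insert_of_mem hbV)⟩
        · intro tv' htv' hpos' hnot'
          rcases List.mem_cons.mp htv' with h | h
          · subst h; exact List.mem_cons_self
          · by_cases hbb : (tv'.1 + c.1, tv'.2 + c.2) = (tv.1 + c.1, tv.2 + c.2)
            · rw [hbb]; exact List.mem_cons_self
            · refine List.mem_cons_of_mem _ (hcover' tv' h hpos' ?_)
              intro hx
              rcases Finset.mem_insert.mp hx with h' | h'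
              · exact hbb h'
              · exact hnot' h'
        · have hset : insert (tv.1 + c.1, tv.2 + c.2) V ∪ news'.toFinset
              = V ∪ ((tv.1 + c.1, tv.2 + c.2) :: news').toFinset := by
            ext x
            simp only [Finset.mem_union, Finset.mem_insert, List.toFinset_cons]
            tauto
          rwa [hset] at hGN
      · rw [if_neg (fun hcc => hcond (hguard.mp hcc))]
        obtain ⟨news', gN, heq, hnd', hprops', hcover', hGN⟩ :=
          ih V g q total cnt hG hVP hnd.2 (fun tv' htv' => hmem tv' (List.mem_cons_of_mem _ htv'))
        refine ⟨news', gN, heq, hnd', hprops', ?_, hGN⟩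
        intro tv' htv' hpos' hnot'
        rcases List.mem_cons.mp htv' with h | h
        · subst h; exact absurd ⟨hpos', hnot'⟩ hcond
        · exact hcover' tv' h hpos' hnot'

lemma pvBfsLoop_spec (g0 : List (List Int)) (s : Int × Int) :
    ∀ (fuel : Nat) (V W : Finset (Int × Int)) (g : List (List Int)) (q : List (Int × Int)),
      pvClosed g0 V → V ⊆ pvP g0 → s ∉ V → s ∈ pvP g0 →
      pvGInv g0 W g → W ⊆ pvP g0 → V ⊆ W → W ⊆ V ∪ pvComp g0 s → s ∈ W →
      q.Nodup → (∀ c ∈ q, c ∈ W ∧ c ∉ V) →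
      (∀ a ∈ W, a ∈ q ∨ ∀ b, pvAdj g0 a b → b ∈ W) →
      5 * (pvP g0 \ W).card + q.length < fuel →
      ∃ gF, pvBfsLoop fuel g q ((W \ V).sum (pvVal g0)) (((W \ V).card : Nat) : Int)
          = (gF, (pvComp g0 s).sum (pvVal g0), (((pvComp g0 s).card : Nat) : Int)) ∧
        pvGInv g0 (V ∪ pvComp g0 s) gF := by
  intro fuel
  induction fuel with
  | zero =>
      intro V W g q _ _ _ _ _ _ _ _ _ _ _ _ hfuel
      omega
  | succ f ihf =>
      intro V W g q hVc hVP hsV hsP hG hWP hVW hWu hsW hqnd hq hbound hfuel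
      cases q with
      | nil =>
          have hWclosed : pvClosed g0 W := by
            intro a ha b hab
            rcases hbound a ha with h | h
            · exact absurd h (by simp)
            · exact h b hab
          have hWU : W = V ∪ pvComp g0 s :=
            le_antisymm hWu (Finset.union_subset hVW (pvComp_subset_closed g0 hWclosed hsW))
          have hdisj : Disjoint V (pvComp g0 s) := pvComp_disjoint g0 hVc hsV
          have hWV : W \ V = pvComp g0 s := by
            rw [hWU, Finset.union_sdiff_cancel_left hdisj]
          refine ⟨g, ?_, ?_⟩
          · simp [pvBfsLoop, hWV]
          · rwa [hWU] at hG
      | cons cq qr =>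
          have hcq := hq cq List.mem_cons_self
          have hcqP : pvPos g0 cq := (pv_mem_pvP g0 cq).mp (hWP hcq.1)
          obtain ⟨news, gN, heq, hndN, hprops, hcover, hGN⟩ :=
            pvFoldA g0 cq hcqP pvMoves W g qr ((W \ V).sum (pvVal g0)) (((W \ V).card : Nat) : Int)
              hG hWP (pvMoves_shift_nodup cq) (pvMoves_shift_mem cq)
          have hNW : ∀ b ∈ news, b ∉ W := fun b hb => (hprops b hb).2
          have hNP : ∀ b ∈ news, b ∈ pvP g0 := fun b hb =>
            (pv_mem_pvP g0 b).mpr (hprops b hb).1.2.1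
          have hNV : ∀ b ∈ news, b ∉ V := fun b hb hbV => hNW b hb (hVW hbV)
          have hcqC : cq ∈ pvComp g0 s := by
            rcases Finset.mem_union.mp (hWu hcq.1) with h | h
            · exact absurd h hcq.2
            · exact h
          have hNC : ∀ b ∈ news, b ∈ pvComp g0 s := fun b hb =>
            pvComp_closed g0 s cq hcqC b (hprops b hb).1
          have hdisjWN : Disjoint (W \ V) news.toFinset := by
            rw [Finset.disjoint_right]
            intro b hb
            simp only [List.mem_toFinset] at hb
            simp [hNW b hb]
          have hsdiff : (W ∪ news.toFinset) \ V = (W \ V) ∪ news.toFinset := by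
            ext x
            simp only [Finset.mem_sdiff, Finset.mem_union, List.mem_toFinset]
            constructor
            · rintro ⟨h1 | h1, h2⟩
              · exact Or.inl ⟨h1, h2⟩
              · exact Or.inr h1
            · rintro (⟨h1, h2⟩ | h1)
              · exact ⟨Or.inl h1, h2⟩
              · exact ⟨Or.inr h1, fun hx => hNV x h1 hx⟩
          have htot : (W \ V).sum (pvVal g0) + (news.map (pvVal g0)).sum
              = ((W ∪ news.toFinset) \ V).sum (pvVal g0) := by
            rw [hsdiff, Finset.sum_union hdisjWN, List.sum_toFinset _ hndN]
          have hcnt : (((W \ V).card : Nat) : Int) + (news.length : Int)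
              = ((((W ∪ news.toFinset) \ V).card : Nat) : Int) := by
            rw [hsdiff, Finset.card_union_of_disjoint hdisjWN,
              List.toFinset_card_of_nodup hndN]
            push_cast
            ring
          simp only [pvBfsLoop]
          rw [heq]
          have hsubPW : news.toFinset ⊆ pvP g0 \ W := by
            intro b hb
            simp only [List.mem_toFinset] at hb
            exact Finset.mem_sdiff.mpr ⟨hNP b hb, hNW b hb⟩
          have hcard1 : news.toFinset.card = news.length := List.toFinset_card_of_nodup hndN
          have hcard2 : news.toFinset.card ≤ (pvP g0 \ W).card := Finset.card_le_card hsubPW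
          have hPsd : (pvP g0 \ (W ∪ news.toFinset)).card
              = (pvP g0 \ W).card - news.toFinset.card := by
            rw [show pvP g0 \ (W ∪ news.toFinset) = (pvP g0 \ W) \ news.toFinset by
                ext x; simp only [Finset.mem_sdiff, Finset.mem_union]; tauto,
              Finset.card_sdiff_of_subset hsubPW]
          have hres := ihf V (W ∪ news.toFinset) gN (qr ++ news) hVc hVP hsV hsP hGN
            (by
              intro x hx
              rcases Finset.mem_union.mp hx with h | h
              · exact hWP h
              · exact hNP x (List.mem_toFinset.mp h))
            (fun x hx => Finset.mem_union_left _ (hVW hx))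
            (by
              intro x hx
              rcases Finset.mem_union.mp hx with h | h
              · exact hWu h
              · exact Finset.mem_union_right _ (hNC x (List.mem_toFinset.mp h)))
            (Finset.mem_union_left _ hsW)
            (by
              refine List.Nodup.append ((List.nodup_cons.mp hqnd).2) hndN ?_
              intro x hx1 hx2
              exact hNW x hx2 ((hq x (List.mem_cons_of_mem _ hx1)).1))
            (by
              intro x hx
              rcases List.mem_append.mp hx with h | h
              · have := hq x (List.mem_cons_of_mem _ h)
                exact ⟨Finset.mem_union_left _ this.1, this.2⟩
              · exact ⟨Finset.mem_union_right _ (List.mem_toFinset.mpr h), hNV x h⟩)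
            (by
              intro a ha
              rcases Finset.mem_union.mp ha with h | h
              · rcases hbound a h with h' | h'
                · rcases List.mem_cons.mp h' with h'' | h''
                  · subst h''
                    right
                    intro b hab
                    by_cases hbW : b ∈ W
                    · exact Finset.mem_union_left _ hbW
                    · obtain ⟨tv, htv, htveq⟩ := pvNbrs_exists_move hab.2.2
                      have := hcover tv htv (by rw [htveq]; exact hab.2.1) (by rw [htveq]; exact hbW)
                      rw [htveq] at this
                      exact Finset.mem_union_right _ (List.mem_toFinset.mpr this)
                  · exact Or.inl (List.mem_append_left _ h'')
                · exact Or.inr fun b hab => Finset.mem_union_left _ (h' b hab)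
              · exact Or.inl (List.mem_append_right _ (List.mem_toFinset.mp h)))
            (by
              have hlq : (cq :: qr).length = qr.length + 1 := rfl
              rw [List.length_append]
              omega)
          obtain ⟨gF, hrun, hGF⟩ := hres
          refine ⟨gF, ?_, hGF⟩
          rw [← hrun, htot, hcnt]

lemma pvBfs_spec (g0 : List (List Int)) {V : Finset (Int × Int)} {g : List (List Int)}
    (hG : pvGInv g0 V g) (hVc : pvClosed g0 V) (hVP : V ⊆ pvP g0)
    {c : Int × Int} (hc : pvPos g0 c) (hcV : c ∉ V) :
    ∃ gF, pvBfs g c.1 c.2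
        = (gF, (pvComp g0 c).sum (pvVal g0), (((pvComp g0 c).card : Nat) : Int)) ∧
      pvGInv g0 (V ∪ pvComp g0 c) gF := by
  have hcols := pvGInv_cols g0 hG
  have hsd : insert c V \ V = {c} := by
    ext x
    simp only [Finset.mem_sdiff, Finset.mem_insert, Finset.mem_singleton]
    constructor
    · rintro ⟨h | h, h2⟩
      · exact h
      · exact absurd h h2
    · rintro rfl
      exact ⟨Or.inl rfl, hcV⟩
  have hmain := pvBfsLoop_spec g0 c
    (5 * g.length * ((PySem.List.pyGet? g 0).getD []).length + 5)
    V (insert c V) (pvGSet g c.1 c.2 (-1)) [c]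
    hVc hVP hcV ((pv_mem_pvP g0 c).mpr hc)
    (pvGInv_set g0 hG hc)
    (by
      intro x hx
      rcases Finset.mem_insert.mp hx with h | h
      · subst h; exact (pv_mem_pvP g0 x).mpr hc
      · exact hVP h)
    (fun x hx => Finset.mem_insert_of_mem hx)
    (by
      intro x hx
      rcases Finset.mem_insert.mp hx with h | h
      · subst h; exact Finset.mem_union_right _ (pv_mem_comp_self g0 ((pv_mem_pvP g0 x).mpr hc))
      · exact Finset.mem_union_left _ h)
    (Finset.mem_insert_self _ _)
    (List.nodup_singleton _)
    (by
      intro x hx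
      rcases List.mem_singleton.mp hx with rfl
      exact ⟨Finset.mem_insert_self _ _, hcV⟩)
    (by
      intro a ha
      rcases Finset.mem_insert.mp ha with h | h
      · subst h; exact Or.inl (List.mem_singleton.mpr rfl)
      · exact Or.inr fun b hab => Finset.mem_insert_of_mem (hVc a h b hab))
    (by
      have h1 : (pvP g0 \ insert c V).card ≤ (pvP g0).card :=
        Finset.card_le_card (Finset.sdiff_subset)
      have h2 := pvP_card_le g0
      have h3 : g.length = g0.length := hG.1
      have h4 : ((PySem.List.pyGet? g 0).getD []).length = (g0.headD []).length := hcols.2.2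
      have h5 : 5 * g.length * ((PySem.List.pyGet? g 0).getD []).length
          = 5 * (g0.length * (g0.headD []).length) := by rw [h3, h4]; ring
      simp only [List.length_singleton]
      rw [h5]
      omega)
  obtain ⟨gF, hrun, hGF⟩ := hmain
  rw [hsd, Finset.sum_singleton, Finset.card_singleton] at hrun
  refine ⟨gF, ?_, hGF⟩
  show pvBfsLoop (5 * g.length * ((PySem.List.pyGet? g 0).getD []).length + 5)
      (pvGSet g c.1 c.2 (-1)) [(c.1, c.2)] (pvGGet g c.1 c.2) 1
    = (gF, (pvComp g0 c).sum (pvVal g0), (((pvComp g0 c).card : Nat) : Int))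
  rw [pvGGet_of_notMem g0 hG c.1 c.2 hc.1 hc.2.2.1 (by simpa using hcV)]
  have hvc : pvVal g0 (c.1, c.2) = pvVal g0 c := by simp
  rw [hvc]
  have hq : [((c.1 : Int), (c.2 : Int))] = [c] := by simp
  rw [hq]
  exact hrun

-- ===== A: the outer double loop, characterized standalone =====
noncomputable def pvVis (g0 : List (List Int)) (done : Finset (Int × Int)) : Finset (Int × Int) :=
  (pvP g0 ∩ done).biUnion (pvComp g0)

lemma pvVis_subset_P (g0 : List (List Int)) (done : Finset (Int × Int)) :
    pvVis g0 done ⊆ pvP g0 := by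
  intro x hx
  obtain ⟨d, _, hxd⟩ := Finset.mem_biUnion.mp hx
  exact pvComp_subset_P g0 d hxd

lemma pvVis_closed (g0 : List (List Int)) (done : Finset (Int × Int)) :
    pvClosed g0 (pvVis g0 done) := by
  intro a ha b hab
  obtain ⟨d, hd, had⟩ := Finset.mem_biUnion.mp ha
  exact Finset.mem_biUnion.mpr ⟨d, hd, pvComp_closed g0 d a had b hab⟩

def pvStepA (st : List (List Int) × Int × Int) (c : Int × Int) : List (List Int) × Int × Int :=
  if pvGGet st.1 c.1 c.2 > 0 then
    let r := pvBfs st.1 c.1 c.2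
    (r.1, st.2.1 + r.2.1, max st.2.2 r.2.2)
  else st

def pvInvA (g0 : List (List Int)) (done : Finset (Int × Int))
    (st : List (List Int) × Int × Int) : Prop :=
  pvGInv g0 (pvVis g0 done) st.1 ∧ st.2.1 = (pvVis g0 done).sum (pvVal g0) ∧
  st.2.2 = ((((pvP g0 ∩ done).sup (fun c => (pvComp g0 c).card)) : Nat) : Int)

lemma pvInter_insert_pos (g0 : List (List Int)) (done : Finset (Int × Int)) {c : Int × Int}
    (hc : c ∈ pvP g0) : pvP g0 ∩ insert c done = insert c (pvP g0 ∩ done) := by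
  ext x
  simp only [Finset.mem_inter, Finset.mem_insert]
  constructor
  · rintro ⟨h1, h2 | h2⟩
    · exact Or.inl h2
    · exact Or.inr ⟨h1, h2⟩
  · rintro (rfl | ⟨h1, h2⟩)
    · exact ⟨hc, Or.inl rfl⟩
    · exact ⟨h1, Or.inr h2⟩

lemma pvStepA_inv (g0 : List (List Int)) (done : Finset (Int × Int))
    (st : List (List Int) × Int × Int) (c : Int × Int)
    (hc1 : 0 ≤ c.1 ∧ c.1 < (g0.length : Int) ∧ 0 ≤ c.2 ∧ c.2 < ((g0.headD []).length : Int))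
    (h : pvInvA g0 done st) : pvInvA g0 (insert c done) (pvStepA st c) := by
  obtain ⟨hG, htot, hmax⟩ := h
  have hgA : pvGGet st.1 c.1 c.2
      = if (c.1, c.2) ∈ pvVis g0 done then -1 else pvGGet g0 c.1 c.2 :=
    hG.2.2 c.1 c.2 hc1.1 hc1.2.2.1
  have heta : ((c.1, c.2) : Int × Int) = c := rfl
  rw [heta] at hgA
  by_cases hpos : 0 < pvVal g0 c
  · have hcP : c ∈ pvP g0 := (pv_mem_pvP g0 c).mpr ⟨hc1.1, hc1.2.1, hc1.2.2.1, hc1.2.2.2, hpos⟩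
    by_cases hcV : c ∈ pvVis g0 done
    · -- already visited: the guard is false and nothing changes
      have hAeq : pvStepA st c = st := by
        rw [pvStepA, if_neg]
        rw [hgA, if_pos hcV]
        omega
      obtain ⟨d, hd, hcd⟩ := Finset.mem_biUnion.mp hcV
      have hcompeq : pvComp g0 c = pvComp g0 d := pvComp_eq_of_mem g0 hcd
      have hVis' : pvVis g0 (insert c done) = pvVis g0 done := by
        rw [pvVis, pvInter_insert_pos g0 done hcP, Finset.biUnion_insert, hcompeq]
        exact Finset.union_eq_right.mpr (Finset.subset_biUnion_of_mem (pvComp g0) hd)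
      have hsup' : (insert c (pvP g0 ∩ done)).sup (fun x => (pvComp g0 x).card)
          = (pvP g0 ∩ done).sup (fun x => (pvComp g0 x).card) := by
        rw [Finset.sup_insert, hcompeq]
        exact max_eq_right (Finset.le_sup (f := fun x => (pvComp g0 x).card) hd)
      rw [hAeq, pvInvA, hVis', pvInter_insert_pos g0 done hcP, hsup']
      exact ⟨hG, htot, hmax⟩
    · -- a new component is flooded
      obtain ⟨gF, hbfs, hGF⟩ := pvBfs_spec g0 hG (pvVis_closed g0 done) (pvVis_subset_P g0 done)
        ⟨hc1.1, hc1.2.1, hc1.2.2.1, hc1.2.2.2, hpos⟩ hcV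
      have hAeq : pvStepA st c
          = (gF, st.2.1 + (pvComp g0 c).sum (pvVal g0),
             max st.2.2 (((pvComp g0 c).card : Nat) : Int)) := by
        rw [pvStepA, if_pos (by rw [hgA, if_neg hcV]; exact hpos)]
        rw [show pvBfs st.1 c.1 c.2
            = (gF, (pvComp g0 c).sum (pvVal g0), (((pvComp g0 c).card : Nat) : Int)) from hbfs]
      have hVis' : pvVis g0 (insert c done) = pvVis g0 done ∪ pvComp g0 c := by
        rw [pvVis, pvInter_insert_pos g0 done hcP, Finset.biUnion_insert]
        exact Finset.union_comm _ _
      have hdisj : Disjoint (pvVis g0 done) (pvComp g0 c) :=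
        pvComp_disjoint g0 (pvVis_closed g0 done) hcV
      rw [hAeq, pvInvA, hVis', pvInter_insert_pos g0 done hcP]
      refine ⟨hGF, ?_, ?_⟩
      · show st.2.1 + (pvComp g0 c).sum (pvVal g0) = _
        rw [htot, Finset.sum_union hdisj]
      · show max st.2.2 (((pvComp g0 c).card : Nat) : Int) = _
        rw [hmax, Finset.sup_insert]
        rw [show ((pvComp g0 c).card ⊔ (pvP g0 ∩ done).sup fun x => (pvComp g0 x).card)
            = max ((pvComp g0 c).card) ((pvP g0 ∩ done).sup fun x => (pvComp g0 x).card) from rfl]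
        rw [Nat.cast_max]
        exact max_comm _ _
  · -- not a positive cell: the guard is false (grid holds val or -1) and done gains nothing
    have hcP : c ∉ pvP g0 := fun hx => hpos ((pv_mem_pvP g0 c).mp hx).2.2.2.2
    have hAeq : pvStepA st c = st := by
      rw [pvStepA, if_neg]
      by_cases hcV : c ∈ pvVis g0 done
      · rw [hgA, if_pos hcV]; omega
      · rw [hgA, if_neg hcV]
        have : pvGGet g0 c.1 c.2 = pvVal g0 c := rfl
        omega
    have hint : pvP g0 ∩ insert c done = pvP g0 ∩ done := by
      ext x
      simp only [Finset.mem_inter, Finset.mem_insert]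
      constructor
      · rintro ⟨h1, h2 | h2⟩
        · subst h2; exact absurd h1 hcP
        · exact ⟨h1, h2⟩
      · rintro ⟨h1, h2⟩
        exact ⟨h1, Or.inr h2⟩
    rw [hAeq, pvInvA, pvVis, hint]
    exact ⟨hG, htot, hmax⟩

lemma pvFoldCellsA (g0 : List (List Int)) :
    ∀ (cs : List (Int × Int)) (done : Finset (Int × Int)) (st : List (List Int) × Int × Int),
      (∀ c ∈ cs, 0 ≤ c.1 ∧ c.1 < (g0.length : Int) ∧ 0 ≤ c.2 ∧
        c.2 < ((g0.headD []).length : Int)) →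
      pvInvA g0 done st →
      pvInvA g0 (done ∪ cs.toFinset) (cs.foldl pvStepA st) := by
  intro cs
  induction cs with
  | nil =>
      intro done st _ h
      simpa using h
  | cons c cs' ih =>
      intro done st hbounds h
      have h₁ := pvStepA_inv g0 done st c (hbounds c List.mem_cons_self) h
      have h' := ih (insert c done) (pvStepA st c)
        (fun x hx => hbounds x (List.mem_cons_of_mem _ hx)) h₁
      rw [List.foldl_cons]
      have hd : insert c done ∪ cs'.toFinset = done ∪ (c :: cs').toFinset := by
        ext x
        simp only [Finset.mem_union, Finset.mem_insert, List.toFinset_cons, Finset.mem_insert]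
        tauto
      rwa [hd] at h'

def pvRow (i : Int) (cc : Int) : List (Int × Int) :=
  (PySem.List.pyRange 0 cc 1).map (fun j => (i, j))

def pvOuterA (st : List (List Int) × Int × Int) (i : Int) : List (List Int) × Int × Int :=
  (PySem.List.pyRange 0 (pvCols st.1) 1).foldl
    (fun (st : List (List Int) × Int × Int) j =>
      if pvGGet st.1 i j > 0 then
        let r := pvBfs st.1 i j
        (r.1, st.2.1 + r.2.1, max st.2.2 r.2.2)
      else st) st

lemma pvRow_inner_A (g0 : List (List Int)) (st : List (List Int) × Int × Int) (i : Int)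
    (hcols : pvCols st.1 = ((g0.headD []).length : Int)) :
    pvOuterA st i = (pvRow i ((g0.headD []).length : Int)).foldl pvStepA st := by
  rw [pvOuterA, hcols, pvRow, List.foldl_map]
  rfl

lemma pvRow_mem {i cc : Int} {x : Int × Int} (hx : x ∈ pvRow i cc) :
    x.1 = i ∧ 0 ≤ x.2 ∧ x.2 < cc := by
  obtain ⟨j, hj, rfl⟩ := List.mem_map.mp hx
  have := PySem.List.mem_pyRange_one.mp hj
  exact ⟨rfl, by omega, by omega⟩

lemma pvRow_mem_of (i : Int) (cc : Int) {j : Int} (h0 : 0 ≤ j) (hj : j < cc) :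
    (i, j) ∈ pvRow i cc := by
  exact List.mem_map.mpr ⟨j, PySem.List.mem_pyRange_one.mpr (by omega), rfl⟩

lemma pvFoldRowsA (g0 : List (List Int)) :
    ∀ (is : List Nat) (done : Finset (Int × Int)) (st : List (List Int) × Int × Int),
      (∀ i ∈ is, i < g0.length) →
      pvInvA g0 done st →
      pvInvA g0
        (done ∪ (is.flatMap
          (fun (i : Nat) => pvRow (i : Int) ((g0.headD []).length : Int))).toFinset)
        (is.foldl (fun st (i : Nat) => pvOuterA st (i : Int)) st) := by
  intro is
  induction is with
  | nil =>
      intro done st _ h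
      simpa using h
  | cons i is' ih =>
      intro done st hlt h
      rw [List.foldl_cons,
        pvRow_inner_A g0 st (i : Int) (pvGInv_cols g0 h.1).1]
      have h₁ := pvFoldCellsA g0 (pvRow (i : Int) ((g0.headD []).length : Int)) done st
        (by
          intro x hx
          obtain ⟨h1, h2, h3⟩ := pvRow_mem hx
          have hiR := hlt i List.mem_cons_self
          refine ⟨by rw [h1]; positivity, by rw [h1]; exact_mod_cast hiR, h2, h3⟩)
        h
      have h' := ih (done ∪ (pvRow (i : Int) ((g0.headD []).length : Int)).toFinset) _
        (fun i' hi' => hlt i' (List.mem_cons_of_mem _ hi')) h₁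
      have hd : done ∪ (pvRow (i : Int) ((g0.headD []).length : Int)).toFinset ∪
            (is'.flatMap (fun (i : Nat) => pvRow (i : Int) ((g0.headD []).length : Int))).toFinset
          = done ∪ ((i :: is').flatMap
              (fun (i : Nat) => pvRow (i : Int) ((g0.headD []).length : Int))).toFinset := by
        rw [List.flatMap_cons, List.toFinset_append, Finset.union_assoc]
      rwa [hd] at h'

lemma pvP_subset_rows (g0 : List (List Int)) :
    pvP g0 ⊆ (∅ : Finset (Int × Int)) ∪ ((List.range g0.length).flatMap
      (fun (i : Nat) => pvRow (i : Int) ((g0.headD []).length : Int))).toFinset := by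
  intro c hcP
  obtain ⟨h1, h2, h3, h4, _⟩ := (pv_mem_pvP g0 c).mp hcP
  refine Finset.mem_union_right _ (List.mem_toFinset.mpr (List.mem_flatMap.mpr
    ⟨c.1.toNat, List.mem_range.mpr (by omega), ?_⟩))
  have hcast : ((c.1.toNat : Nat) : Int) = c.1 := Int.toNat_of_nonneg h1
  rw [hcast]
  have := pvRow_mem_of c.1 ((g0.headD []).length : Int) h3 h4
  simpa using this

lemma pvBiUnion_comp_self (g0 : List (List Int)) :
    (pvP g0).biUnion (pvComp g0) = pvP g0 := by
  apply Finset.ext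
  intro x
  constructor
  · intro hx
    obtain ⟨d, _, hxd⟩ := Finset.mem_biUnion.mp hx
    exact pvComp_subset_P g0 d hxd
  · intro hx
    exact Finset.mem_biUnion.mpr ⟨x, hx, pv_mem_comp_self g0 hx⟩

lemma pv_mainA (g0 : List (List Int)) : find_dummy g0 = pvTarget g0 := by
  have hA : find_dummy g0
      = (((List.range g0.length).foldl (fun st (i : Nat) => pvOuterA st (i : Int)) (g0, 0, 0)).2.1,
         ((List.range g0.length).foldl (fun st (i : Nat) => pvOuterA st (i : Int)) (g0, 0, 0)).2.2) := by
    simp only [find_dummy]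
    rw [PySem.List.len_eq, PySem.List.pyRange_zero_natCast, List.foldl_map]
    rfl
  have h0 : pvInvA g0 (∅ : Finset (Int × Int)) (g0, 0, 0) := by
    refine ⟨?_, ?_, ?_⟩
    · show pvGInv g0 (pvVis g0 ∅) g0
      rw [pvVis]
      simpa using pvGInv_init g0
    · show (0 : Int) = (pvVis g0 ∅).sum (pvVal g0)
      rw [pvVis]; simp
    · show (0 : Int) = _
      simp
  have hfin := pvFoldRowsA g0 (List.range g0.length) ∅ (g0, 0, 0)
    (fun i hi => List.mem_range.mp hi) h0
  obtain ⟨hG, htot, hmax⟩ := hfin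
  have hdone : pvP g0 ∩ ((∅ : Finset (Int × Int)) ∪ ((List.range g0.length).flatMap
      (fun (i : Nat) => pvRow (i : Int) ((g0.headD []).length : Int))).toFinset) = pvP g0 :=
    Finset.inter_eq_left.mpr (pvP_subset_rows g0)
  rw [hdone] at hmax
  rw [hA, pvTarget]
  refine Prod.ext ?_ ?_ <;> dsimp
  · rw [htot, pvVis, hdone, pvBiUnion_comp_self]
  · exact hmax

-- ===== B: connectivity restricted to the processed prefix =====
def pvAdjIn (g0 : List (List Int)) (S : Finset (Int × Int)) (u v : Int × Int) : Prop :=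
  pvAdj g0 u v ∧ u ∈ S ∧ v ∈ S

def pvRIn (g0 : List (List Int)) (S : Finset (Int × Int)) (x y : Int × Int) : Prop :=
  Relation.ReflTransGen (pvAdjIn g0 S) x y

lemma pvRIn_symm (g0 : List (List Int)) (S : Finset (Int × Int)) {x y : Int × Int}
    (h : pvRIn g0 S x y) : pvRIn g0 S y x := by
  induction h with
  | refl => exact Relation.ReflTransGen.refl
  | tail _ hstep ih =>
      exact Relation.ReflTransGen.trans
        (Relation.ReflTransGen.single ⟨pvAdj_symm g0 hstep.1, hstep.2.2, hstep.2.1⟩) ih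

lemma pvRIn_end (g0 : List (List Int)) {S : Finset (Int × Int)} {c x : Int × Int}
    (hc : c ∉ S) (h : pvRIn g0 S x c) : x = c := by
  rcases Relation.ReflTransGen.cases_tail h with h' | ⟨b, _, hstep⟩
  · exact h'.symm
  · exact absurd hstep.2.2 hc

lemma pvRIn_start (g0 : List (List Int)) {S : Finset (Int × Int)} {c y : Int × Int}
    (hc : c ∉ S) (h : pvRIn g0 S c y) : y = c :=
  pvRIn_end g0 hc (pvRIn_symm g0 S h)

lemma pvRIn_mono (g0 : List (List Int)) {S T : Finset (Int × Int)} (hST : S ⊆ T)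
    {x y : Int × Int} (h : pvRIn g0 S x y) : pvRIn g0 T x y := by
  induction h with
  | refl => exact Relation.ReflTransGen.refl
  | tail _ hstep ih =>
      exact Relation.ReflTransGen.tail ih ⟨hstep.1, hST hstep.2.1, hST hstep.2.2⟩

lemma pvRIn_insert_notPos (g0 : List (List Int)) {S : Finset (Int × Int)} {c : Int × Int}
    (hc : ¬ pvPos g0 c) (x y : Int × Int) :
    pvRIn g0 (insert c S) x y ↔ pvRIn g0 S x y := by
  constructor
  · intro h
    induction h with
    | refl => exact Relation.ReflTransGen.refl
    | tail _ hstep ih =>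
        refine Relation.ReflTransGen.tail ih ⟨hstep.1, ?_, ?_⟩
        · rcases Finset.mem_insert.mp hstep.2.1 with h' | h'
          · exact absurd (h' ▸ hstep.1.1) hc
          · exact h'
        · rcases Finset.mem_insert.mp hstep.2.2 with h' | h'
          · exact absurd (h' ▸ hstep.1.2.1) hc
          · exact h'
  · exact pvRIn_mono g0 (Finset.subset_insert c S)

lemma pvRIn_full (g0 : List (List Int)) {F : Finset (Int × Int)}
    (hF : ∀ u, pvPos g0 u → u ∈ F) (x y : Int × Int) :
    pvRIn g0 F x y ↔ pvReach g0 x y := by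
  constructor
  · intro h
    induction h with
    | refl => exact Relation.ReflTransGen.refl
    | tail _ hstep ih => exact Relation.ReflTransGen.tail ih hstep.1
  · intro h
    induction h with
    | refl => exact Relation.ReflTransGen.refl
    | tail _ hstep ih =>
        exact Relation.ReflTransGen.tail ih ⟨hstep, hF _ hstep.1, hF _ hstep.2.1⟩

-- the connectivity relation of the prefix extended by cell c merged with its
-- already-processed neighbours nbs, written as one proposition
def pvCC (g0 : List (List Int)) (S : Finset (Int × Int)) (c : Int × Int)
    (nbs : List (Int × Int)) (z : Int × Int) : Prop :=
  z = c ∨ ∃ u ∈ nbs, pvRIn g0 S z u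

def pvF (g0 : List (List Int)) (S : Finset (Int × Int)) (c : Int × Int)
    (nbs : List (Int × Int)) (x y : Int × Int) : Prop :=
  pvRIn g0 S x y ∨ (pvCC g0 S c nbs x ∧ pvCC g0 S c nbs y)

lemma pvF_nil (g0 : List (List Int)) (S : Finset (Int × Int)) (c : Int × Int)
    (x y : Int × Int) : pvF g0 S c [] x y ↔ pvRIn g0 S x y := by
  simp only [pvF, pvCC, List.not_mem_nil, false_and, exists_false, or_false]
  constructor
  · rintro (h | ⟨rfl, rfl⟩)
    · exact h
    · exact Relation.ReflTransGen.refl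
  · exact Or.inl

lemma pvF_symm (g0 : List (List Int)) {S : Finset (Int × Int)} {c : Int × Int}
    {nbs : List (Int × Int)} {x y : Int × Int} (h : pvF g0 S c nbs x y) :
    pvF g0 S c nbs y x := by
  rcases h with h | ⟨h1, h2⟩
  · exact Or.inl (pvRIn_symm g0 S h)
  · exact Or.inr ⟨h2, h1⟩

lemma pvCC_of_rin (g0 : List (List Int)) {S : Finset (Int × Int)} {c : Int × Int}
    {nbs : List (Int × Int)} {x z : Int × Int} (hcS : c ∉ S)
    (h : pvRIn g0 S x z) (hz : pvCC g0 S c nbs z) : pvCC g0 S c nbs x := by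
  rcases hz with rfl | ⟨u, hu, hru⟩
  · exact Or.inl (pvRIn_end g0 hcS h)
  · exact Or.inr ⟨u, hu, h.trans hru⟩

lemma pvF_trans (g0 : List (List Int)) {S : Finset (Int × Int)} {c : Int × Int}
    {nbs : List (Int × Int)} (hcS : c ∉ S) {x y z : Int × Int}
    (h1 : pvF g0 S c nbs x y) (h2 : pvF g0 S c nbs y z) : pvF g0 S c nbs x z := by
  rcases h1 with h1 | ⟨ha, hb⟩
  · rcases h2 with h2 | ⟨hc', hd⟩
    · exact Or.inl (h1.trans h2)
    · exact Or.inr ⟨pvCC_of_rin g0 hcS h1 hc', hd⟩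
  · rcases h2 with h2 | ⟨hc', hd⟩
    · exact Or.inr ⟨ha, pvCC_of_rin g0 hcS (pvRIn_symm g0 S h2) hb⟩
    · exact Or.inr ⟨ha, hd⟩

-- the class-union produced by one executed merge, in pvF form
lemma pvJoin_F (g0 : List (List Int)) {S : Finset (Int × Int)} {c : Int × Int}
    (hcS : c ∉ S) (nbs : List (Int × Int)) (v : Int × Int) (x y : Int × Int) :
    (pvF g0 S c nbs x y ∨ (pvF g0 S c nbs x c ∧ pvF g0 S c nbs v y) ∨
      (pvF g0 S c nbs x v ∧ pvF g0 S c nbs c y))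
    ↔ pvF g0 S c (nbs ++ [v]) x y := by
  have hFc : ∀ w : Int × Int, pvF g0 S c nbs w c ↔ pvCC g0 S c nbs w := by
    intro w
    constructor
    · rintro (h | ⟨h1, _⟩)
      · exact Or.inl (pvRIn_end g0 hcS h)
      · exact h1
    · intro h
      exact Or.inr ⟨h, Or.inl rfl⟩
  have hcF : ∀ w : Int × Int, pvF g0 S c nbs c w ↔ pvCC g0 S c nbs w := by
    intro w
    constructor
    · intro h
      exact (hFc w).mp (pvF_symm g0 h)
    · intro h
      exact pvF_symm g0 ((hFc w).mpr h)
  have hCC' : ∀ w : Int × Int, pvCC g0 S c (nbs ++ [v]) w ↔ (pvCC g0 S c nbs w ∨ pvRIn g0 S w v) := by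
    intro w
    simp only [pvCC, List.mem_append, List.mem_singleton]
    constructor
    · rintro (rfl | ⟨u, hu | rfl, hru⟩)
      · exact Or.inl (Or.inl rfl)
      · exact Or.inl (Or.inr ⟨u, hu, hru⟩)
      · exact Or.inr hru
    · rintro ((rfl | ⟨u, hu, hru⟩) | h)
      · exact Or.inl rfl
      · exact Or.inr ⟨u, Or.inl hu, hru⟩
      · exact Or.inr ⟨v, Or.inr rfl, h⟩
  constructor
  · rintro (h | ⟨h1, h2⟩ | ⟨h1, h2⟩)
    · rcases h with h | ⟨h1, h2⟩
      · exact Or.inl h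
      · exact Or.inr ⟨(hCC' x).mpr (Or.inl h1), (hCC' y).mpr (Or.inl h2)⟩
    · -- x ~ c and v ~ y
      have hx : pvCC g0 S c nbs x := (hFc x).mp h1
      rcases h2 with h2 | ⟨h2a, h2b⟩
      · exact Or.inr ⟨(hCC' x).mpr (Or.inl hx), (hCC' y).mpr (Or.inr (pvRIn_symm g0 S h2))⟩
      · exact Or.inr ⟨(hCC' x).mpr (Or.inl hx), (hCC' y).mpr (Or.inl h2b)⟩
    · -- x ~ v and c ~ y
      have hy : pvCC g0 S c nbs y := (hcF y).mp h2
      rcases h1 with h1 | ⟨h1a, h1b⟩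
      · exact Or.inr ⟨(hCC' x).mpr (Or.inr h1), (hCC' y).mpr (Or.inl hy)⟩
      · exact Or.inr ⟨(hCC' x).mpr (Or.inl h1a), (hCC' y).mpr (Or.inl hy)⟩
  · rintro (h | ⟨h1, h2⟩)
    · exact Or.inl (Or.inl h)
    · rcases (hCC' x).mp h1 with h1' | h1'
      · rcases (hCC' y).mp h2 with h2' | h2'
        · exact Or.inl (Or.inr ⟨h1', h2'⟩)
        · -- x in old class-of-c, y ~ v
          exact Or.inr (Or.inl ⟨(hFc x).mpr h1', Or.inl (pvRIn_symm g0 S h2')⟩)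
      · rcases (hCC' y).mp h2 with h2' | h2'
        · exact Or.inr (Or.inr ⟨Or.inl h1', (hcF y).mpr h2'⟩)
        · exact Or.inl (Or.inl (h1'.trans (pvRIn_symm g0 S h2')))

-- extending the processed prefix by c connects exactly c's class with the classes
-- of its already-processed neighbours
lemma pvF_insert_iff (g0 : List (List Int)) {S : Finset (Int × Int)} {c : Int × Int}
    (hc : pvPos g0 c) (hcS : c ∉ S) (nbs : List (Int × Int))
    (hnbs : ∀ u ∈ nbs, pvAdj g0 c u ∧ u ∈ S)
    (hsub : ∀ u, pvAdj g0 u c → u ∈ S → u ∈ nbs) (x y : Int × Int) :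
    pvRIn g0 (insert c S) x y ↔ pvF g0 S c nbs x y := by
  have hccnbrs : c ∉ pvNbrs c := by
    rcases c with ⟨a, b⟩
    simp only [pvNbrs, List.mem_cons, Prod.mk.injEq, List.not_mem_nil, or_false]
    omega
  constructor
  · intro h
    induction h with
    | refl => exact Or.inl Relation.ReflTransGen.refl
    | @tail u v _ hstep ih =>
        by_cases hvc : v = c
        · rw [hvc] at hstep ⊢
          have huc : u ≠ c := by
            intro he
            exact hccnbrs (he ▸ hstep.1.2.2)
          have huS : u ∈ S := by
            rcases Finset.mem_insert.mp hstep.2.1 with h' | h'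
            · exact absurd h' huc
            · exact h'
          have hunbs : u ∈ nbs := hsub u hstep.1 huS
          refine Or.inr ⟨?_, Or.inl rfl⟩
          rcases ih with h' | ⟨h1, _⟩
          · exact Or.inr ⟨u, hunbs, h'⟩
          · exact h1
        · have hvS : v ∈ S := by
            rcases Finset.mem_insert.mp hstep.2.2 with h' | h'
            · exact absurd h' hvc
            · exact h'
          by_cases huc : u = c
          · rw [huc] at hstep ih
            have hvnbs : v ∈ nbs := hsub v (pvAdj_symm g0 hstep.1) hvS
            have hCCx : pvCC g0 S c nbs x := by
              rcases ih with h' | ⟨h1, _⟩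
              · exact Or.inl (pvRIn_end g0 hcS h')
              · exact h1
            exact Or.inr ⟨hCCx, Or.inr ⟨v, hvnbs, Relation.ReflTransGen.refl⟩⟩
          · have huS : u ∈ S := by
              rcases Finset.mem_insert.mp hstep.2.1 with h' | h'
              · exact absurd h' huc
              · exact h'
            have hstep' : pvAdjIn g0 S u v := ⟨hstep.1, huS, hvS⟩
            rcases ih with h' | ⟨h1, h2⟩
            · exact Or.inl (Relation.ReflTransGen.tail h' hstep')
            · refine Or.inr ⟨h1, ?_⟩
              rcases h2 with rfl | ⟨w, hw, hrw⟩
              · exact absurd rfl huc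
              · exact Or.inr ⟨w, hw,
                  Relation.ReflTransGen.trans
                    (Relation.ReflTransGen.single ⟨pvAdj_symm g0 hstep.1, hvS, huS⟩) hrw⟩
  · intro h
    have hCCc : ∀ z, pvCC g0 S c nbs z → pvRIn g0 (insert c S) z c := by
      intro z hz
      rcases hz with rfl | ⟨u, hu, hru⟩
      · exact Relation.ReflTransGen.refl
      · refine Relation.ReflTransGen.tail (pvRIn_mono g0 (Finset.subset_insert c S) hru) ?_
        exact ⟨pvAdj_symm g0 (hnbs u hu).1, Finset.mem_insert_of_mem (hnbs u hu).2,
          Finset.mem_insert_self c S⟩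
    rcases h with h | ⟨h1, h2⟩
    · exact pvRIn_mono g0 (Finset.subset_insert c S) h
    · exact (hCCc x h1).trans (pvRIn_symm g0 _ (hCCc y h2))

-- ===== B: dictionary-level facts about the label/members state =====
lemma pvGet?_foldl_insert {κ ν : Type} [BEq κ] [LawfulBEq κ] (b : ν) :
    ∀ (ma : List κ) (L : PySem.Dict κ ν) (y : κ),
      (ma.foldl (fun L x => PySem.Dict.insert L x b) L).get? y
        = if y ∈ ma then some b else L.get? y := by
  intro ma
  induction ma with
  | nil => intro L y; simp
  | cons x ma' ih =>
      intro L y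
      rw [List.foldl_cons, ih]
      by_cases hy : y ∈ ma'
      · simp [hy]
      · by_cases hyx : y = x
        · subst hyx
          simp [hy, PySem.Dict.get?_insert_self]
        · simp [hy, hyx, PySem.Dict.get?_insert_of_ne _ _ hyx]

lemma pvFind?_filter_ne {κ ν : Type} [BEq κ] [LawfulBEq κ] [DecidableEq κ] (k y : κ) :
    ∀ (l : List (κ × ν)),
      (l.filter (fun p => !(p.1 == k))).find? (fun p => p.1 == y)
        = if y = k then none else l.find? (fun p => p.1 == y) := by
  intro l
  induction l with
  | nil => simp
  | cons p t ih =>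
      rw [List.filter_cons]
      by_cases hpk : p.1 = k
      · rw [if_neg (by simp [hpk])]
        by_cases hyk : y = k
        · simp [hyk]
        · have hpy : ¬ ((p.1 == y) = true) := by
            simp only [beq_iff_eq, hpk]
            exact fun h => hyk h.symm
          rw [ih, if_neg hyk, if_neg hyk]
          exact (List.find?_cons_of_neg (p := fun (q : κ × ν) => q.1 == y) hpy).symm
      · rw [if_pos (by simp [hpk])]
        by_cases hpy : p.1 = y
        · rw [List.find?_cons_of_pos (by simpa using hpy), if_neg (fun h => hpk (hpy.trans h))]
          exact (List.find?_cons_of_pos (by simpa using hpy)).symm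
        · rw [List.find?_cons_of_neg (by simpa using hpy), ih]
          by_cases hyk : y = k
          · simp [hyk]
          · rw [if_neg hyk, if_neg hyk]
            exact (List.find?_cons_of_neg (by simpa using hpy)).symm

lemma pvGet?_erase {κ ν : Type} [BEq κ] [LawfulBEq κ] [DecidableEq κ] (d : PySem.Dict κ ν) (k y : κ) :
    (d.erase k).get? y = if y = k then none else d.get? y := by
  obtain ⟨items⟩ := d
  simp only [PySem.Dict.get?, PySem.Dict.erase]
  rw [pvFind?_filter_ne]
  by_cases h : y = k <;> simp [h]

lemma pvKeys_erase {κ ν : Type} [BEq κ] [LawfulBEq κ] (d : PySem.Dict κ ν) (k : κ) :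
    (d.erase k).keys = d.keys.filter (fun x => !(x == k)) := by
  obtain ⟨items⟩ := d
  simp only [PySem.Dict.keys, PySem.Dict.erase]
  induction items with
  | nil => simp
  | cons p t ih =>
      by_cases hpk : p.1 = k
      · simp [hpk, ih]
      · simp [show (p.1 == k) = false by simpa using hpk, ih]

lemma pvMem_keys_erase {κ ν : Type} [BEq κ] [LawfulBEq κ] (d : PySem.Dict κ ν) (k y : κ) :
    y ∈ (d.erase k).keys ↔ y ∈ d.keys ∧ y ≠ k := by
  rw [pvKeys_erase, List.mem_filter]
  simp

lemma pvNodup_keys_erase {κ ν : Type} [BEq κ] [LawfulBEq κ] (d : PySem.Dict κ ν) (k : κ)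
    (h : d.keys.Nodup) : (d.erase k).keys.Nodup := by
  rw [pvKeys_erase]
  exact h.filter _

-- label[x], as the proofs read it (x is a key whenever it matters)
def pvLab (label : PySem.Dict (Int × Int) (Int × Int)) (x : Int × Int) : Int × Int :=
  (PySem.Dict.get? label x).getD x

-- the state of B's label/members dictionaries over the processed positive cells K,
-- for a given "same component so far" relation R
def pvLSt (K : Finset (Int × Int)) (R : Int × Int → Int × Int → Prop)
    (label : PySem.Dict (Int × Int) (Int × Int))
    (members : PySem.Dict (Int × Int) (List (Int × Int))) : Prop :=
  label.keys.Nodup ∧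
  (∀ x, x ∈ label.keys ↔ x ∈ K) ∧
  (∀ x ∈ K, pvLab label x ∈ K) ∧
  (∀ x ∈ K, ∀ y ∈ K, (pvLab label x = pvLab label y ↔ R x y)) ∧
  members.keys.Nodup ∧
  (∀ l, l ∈ members.keys ↔ ∃ x ∈ K, pvLab label x = l) ∧
  (∀ l m, members.get? l = some m → m.Nodup ∧ ∀ x, x ∈ m ↔ x ∈ K ∧ pvLab label x = l)

lemma pvLSt_congr {K : Finset (Int × Int)} {R R' : Int × Int → Int × Int → Prop}
    {label : PySem.Dict (Int × Int) (Int × Int)}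
    {members : PySem.Dict (Int × Int) (List (Int × Int))}
    (h : pvLSt K R label members)
    (hiff : ∀ x ∈ K, ∀ y ∈ K, (R x y ↔ R' x y)) : pvLSt K R' label members := by
  obtain ⟨h1, h2, h3, h4, h5, h6, h7⟩ := h
  exact ⟨h1, h2, h3, fun x hx y hy => (h4 x hx y hy).trans (hiff x hx y hy), h5, h6, h7⟩

lemma pvLSt_insert {K : Finset (Int × Int)} {R : Int × Int → Int × Int → Prop}
    {label : PySem.Dict (Int × Int) (Int × Int)}
    {members : PySem.Dict (Int × Int) (List (Int × Int))}
    (h : pvLSt K R label members) {c : Int × Int} (hc : c ∉ K)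
    (hRrefl : R c c) (hRc1 : ∀ y ∈ K, ¬ R c y) (hRc2 : ∀ y ∈ K, ¬ R y c) :
    pvLSt (insert c K) R (label.insert c c) (members.insert c [c]) := by
  obtain ⟨h1, h2, h3, h4, h5, h6, h7⟩ := h
  have hlab' : ∀ y, pvLab (label.insert c c) y = if y = c then c else pvLab label y := by
    intro y
    rw [pvLab, PySem.Dict.get?_insert]
    by_cases hy : y = c <;> simp [hy, pvLab]
  have hlabK : ∀ x ∈ K, pvLab (label.insert c c) x = pvLab label x := by
    intro x hx
    rw [hlab', if_neg (by rintro rfl; exact hc hx)]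
  have hlabne : ∀ x ∈ K, pvLab label x ≠ c := fun x hx he => hc (he ▸ h3 x hx)
  refine ⟨PySem.Dict.nodup_keys_insert _ _ _ h1, ?_, ?_, ?_, ?_, ?_, ?_⟩
  · intro x
    rw [PySem.Dict.mem_keys_insert, h2, Finset.mem_insert]
  · intro x hx
    rcases Finset.mem_insert.mp hx with rfl | hx'
    · rw [hlab', if_pos rfl]; exact Finset.mem_insert_self _ _
    · rw [hlabK x hx']; exact Finset.mem_insert_of_mem (h3 x hx')
  · intro x hx y hy
    rcases Finset.mem_insert.mp hx with rfl | hx'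
    · rcases Finset.mem_insert.mp hy with rfl | hy'
      · rw [hlab', if_pos rfl]
        exact iff_of_true rfl hRrefl
      · rw [hlab', if_pos rfl, hlabK y hy']
        exact iff_of_false (fun he => hlabne y hy' he.symm) (hRc1 y hy')
    · rcases Finset.mem_insert.mp hy with rfl | hy'
      · rw [hlabK x hx', hlab', if_pos rfl]
        exact iff_of_false (hlabne x hx') (hRc2 x hx')
      · rw [hlabK x hx', hlabK y hy']
        exact h4 x hx' y hy'
  · exact PySem.Dict.nodup_keys_insert _ _ _ h5
  · intro l
    rw [PySem.Dict.mem_keys_insert, h6]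
    constructor
    · rintro (h | ⟨x, hx, hlx⟩)
      · refine ⟨c, Finset.mem_insert_self _ _, ?_⟩
        rw [hlab', if_pos rfl, h]
      · exact ⟨x, Finset.mem_insert_of_mem hx, by rw [hlabK x hx]; exact hlx⟩
    · rintro ⟨x, hx, hlx⟩
      rcases Finset.mem_insert.mp hx with rfl | hx'
      · rw [hlab', if_pos rfl] at hlx
        exact Or.inl hlx.symm
      · rw [hlabK x hx'] at hlx
        exact Or.inr ⟨x, hx', hlx⟩
  · intro l m hm
    rw [PySem.Dict.get?_insert] at hm
    by_cases hl : l = c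
    · subst hl
      rw [if_pos rfl] at hm
      obtain rfl : [l] = m := by injection hm
      refine ⟨List.nodup_singleton _, ?_⟩
      intro x
      simp only [List.mem_singleton]
      constructor
      · rintro rfl
        exact ⟨Finset.mem_insert_self _ _, by rw [hlab', if_pos rfl]⟩
      · rintro ⟨hx, hlx⟩
        rcases Finset.mem_insert.mp hx with rfl | hx'
        · rfl
        · rw [hlabK x hx'] at hlx
          exact absurd hlx (hlabne x hx')
    · rw [if_neg hl] at hm
      obtain ⟨hnd, hmem⟩ := h7 l m hm
      refine ⟨hnd, ?_⟩
      intro x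
      rw [hmem]
      constructor
      · rintro ⟨hx, hlx⟩
        exact ⟨Finset.mem_insert_of_mem hx, by rw [hlabK x hx]; exact hlx⟩
      · rintro ⟨hx, hlx⟩
        rcases Finset.mem_insert.mp hx with rfl | hx'
        · rw [hlab', if_pos rfl] at hlx
          exact absurd hlx.symm hl
        · rw [hlabK x hx'] at hlx
          exact ⟨hx', hlx⟩

-- one executed merge: the classes of wa and wb are united, the smaller-moved list is ma
lemma pvMergeAux {K : Finset (Int × Int)} {R : Int × Int → Int × Int → Prop}
    {label : PySem.Dict (Int × Int) (Int × Int)}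
    {members : PySem.Dict (Int × Int) (List (Int × Int))}
    (h : pvLSt K R label members)
    (hsym : ∀ x y, R x y → R y x) (htrans : ∀ x y z, R x y → R y z → R x z)
    {wa wb : Int × Int} (hwa : wa ∈ K) (hwb : wb ∈ K) (hnR : ¬ R wa wb) :
    pvLSt K (fun x y => R x y ∨ (R x wa ∧ R wb y) ∨ (R x wb ∧ R wa y))
      ((PySem.Dict.getD members (pvLab label wa) []).foldl
        (fun L x => PySem.Dict.insert L x (pvLab label wb)) label)
      (PySem.Dict.modify
        (PySem.Dict.erase members (pvLab label wa)) (pvLab label wb) []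
        (· ++ PySem.Dict.getD members (pvLab label wa) [])) := by
  obtain ⟨h1, h2, h3, h4, h5, h6, h7⟩ := h
  have hab : pvLab label wa ≠ pvLab label wb := fun he => hnR ((h4 wa hwa wb hwb).mp he)
  have haK : pvLab label wa ∈ members.keys := (h6 _).mpr ⟨wa, hwa, rfl⟩
  have hbK : pvLab label wb ∈ members.keys := (h6 _).mpr ⟨wb, hwb, rfl⟩
  obtain ⟨ma, hma⟩ : ∃ m, members.get? (pvLab label wa) = some m := by
    cases hga : members.get? (pvLab label wa) with
    | none =>
        rw [PySem.Dict.get?_eq_none_iff_not_mem_keys] at hga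
        exact absurd haK hga
    | some m => exact ⟨m, rfl⟩
  obtain ⟨mb, hmb⟩ : ∃ m, members.get? (pvLab label wb) = some m := by
    cases hgb : members.get? (pvLab label wb) with
    | none =>
        rw [PySem.Dict.get?_eq_none_iff_not_mem_keys] at hgb
        exact absurd hbK hgb
    | some m => exact ⟨m, rfl⟩
  have hmaD : PySem.Dict.getD members (pvLab label wa) [] = ma :=
    PySem.Dict.getD_of_get?_eq_some _ _ hma
  obtain ⟨hand, hamem⟩ := h7 _ ma hma
  obtain ⟨hbnd, hbmem⟩ := h7 _ mb hmb
  have hRwaa : ∀ x ∈ K, (pvLab label x = pvLab label wa ↔ R x wa) :=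
    fun x hx => h4 x hx wa hwa
  have hRwbb : ∀ x ∈ K, (pvLab label x = pvLab label wb ↔ R x wb) :=
    fun x hx => h4 x hx wb hwb
  have hmem_iff : ∀ x ∈ K, (x ∈ ma ↔ R x wa) := by
    intro x hx
    rw [hamem]
    exact ⟨fun hh => (hRwaa x hx).mp hh.2, fun hh => ⟨hx, (hRwaa x hx).mpr hh⟩⟩
  have hmemK : ∀ x ∈ ma, x ∈ K := fun x hx => ((hamem x).mp hx).1
  rw [hmaD]
  have hL' : ∀ y, ((ma.foldl (fun L x => PySem.Dict.insert L x (pvLab label wb)) label)).get? y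
      = if y ∈ ma then some (pvLab label wb) else label.get? y :=
    pvGet?_foldl_insert _ ma label
  have hlab' : ∀ y, pvLab (ma.foldl (fun L x => PySem.Dict.insert L x (pvLab label wb)) label) y
      = if y ∈ ma then pvLab label wb else pvLab label y := by
    intro y
    rw [pvLab, hL']
    by_cases hy : y ∈ ma <;> simp [hy, pvLab]
  have hkeys' : (ma.foldl (fun L x => PySem.Dict.insert L x (pvLab label wb)) label).keys
      = PySem.Set.update label.keys ma := PySem.Dict.keys_foldl_insert ma _ label
  -- the members dict after pop(a) and extend(b)
  have hgeb : (members.erase (pvLab label wa)).get? (pvLab label wb) = some mb := by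
    rw [pvGet?_erase, if_neg (fun hh => hab hh.symm)]
    exact hmb
  have hmod : PySem.Dict.modify (PySem.Dict.erase members (pvLab label wa)) (pvLab label wb) []
        (· ++ ma)
      = (members.erase (pvLab label wa)).insert (pvLab label wb) (mb ++ ma) := by
    rw [PySem.Dict.modify, PySem.Dict.getD_of_get?_eq_some _ _ hgeb]
  have hbK' : pvLab label wb ∈ (members.erase (pvLab label wa)).keys :=
    (pvMem_keys_erase _ _ _).mpr ⟨hbK, fun hh => hab hh.symm⟩
  have hmkeys' : (PySem.Dict.modify (PySem.Dict.erase members (pvLab label wa)) (pvLab label wb) []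
        (· ++ ma)).keys = (members.erase (pvLab label wa)).keys := by
    rw [hmod]
    exact PySem.Dict.keys_insert_of_contains _ _ ((PySem.Dict.contains_iff_mem_keys _ _).mpr hbK')
  refine ⟨?_, ?_, ?_, ?_, ?_, ?_, ?_⟩
  · exact PySem.Dict.nodup_keys_foldl_insert ma _ label h1
  · intro x
    rw [hkeys', PySem.Set.mem_update, h2]
    exact ⟨fun hh => hh.elim id (fun hx => hmemK x hx), Or.inl⟩
  · intro x hx
    rw [hlab']
    by_cases hxm : x ∈ ma
    · rw [if_pos hxm]; exact h3 wb hwb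
    · rw [if_neg hxm]; exact h3 x hx
  · intro x hx y hy
    rw [hlab', hlab']
    by_cases hxm : R x wa
    · rw [if_pos ((hmem_iff x hx).mpr hxm)]
      by_cases hym : R y wa
      · rw [if_pos ((hmem_iff y hy).mpr hym)]
        exact iff_of_true rfl (Or.inl (htrans x wa y hxm (hsym y wa hym)))
      · rw [if_neg (fun hh => hym ((hmem_iff y hy).mp hh))]
        constructor
        · intro he
          exact Or.inr (Or.inl ⟨hxm, hsym y wb ((hRwbb y hy).mp he.symm)⟩)
        · rintro (hr | ⟨_, hwby⟩ | ⟨_, hway⟩)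
          · exact absurd (htrans y x wa (hsym x y hr) hxm) hym
          · exact ((hRwbb y hy).mpr (hsym wb y hwby)).symm
          · exact absurd (hsym wa y hway) hym
    · rw [if_neg (fun hh => hxm ((hmem_iff x hx).mp hh))]
      by_cases hym : R y wa
      · rw [if_pos ((hmem_iff y hy).mpr hym)]
        constructor
        · intro he
          exact Or.inr (Or.inr ⟨(hRwbb x hx).mp he, hsym y wa hym⟩)
        · rintro (hr | ⟨hxwa, _⟩ | ⟨hxwb, _⟩)
          · exact absurd (htrans x y wa hr hym) hxm
          · exact absurd hxwa hxm
          · exact (hRwbb x hx).mpr hxwb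
      · rw [if_neg (fun hh => hym ((hmem_iff y hy).mp hh))]
        rw [h4 x hx y hy]
        constructor
        · exact Or.inl
        · rintro (hr | ⟨hxwa, _⟩ | ⟨_, hway⟩)
          · exact hr
          · exact absurd hxwa hxm
          · exact absurd (hsym wa y hway) hym
  · rw [hmkeys']
    exact pvNodup_keys_erase _ _ h5
  · intro l
    rw [hmkeys', pvMem_keys_erase, h6]
    constructor
    · rintro ⟨⟨x, hx, hlx⟩, hla⟩
      by_cases hlb : l = pvLab label wb
      · refine ⟨wb, hwb, ?_⟩
        rw [hlab', if_neg (fun hh => hnR (hsym wb wa ((hmem_iff wb hwb).mp hh))), ← hlb]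
      · refine ⟨x, hx, ?_⟩
        have hxm : x ∉ ma := by
          rw [hamem]
          rintro ⟨_, hhx⟩
          exact hla (hlx ▸ hhx.symm ▸ rfl)
        rw [hlab', if_neg hxm]
        exact hlx
    · rintro ⟨x, hx, hlx⟩
      rw [hlab'] at hlx
      by_cases hxm : x ∈ ma
      · rw [if_pos hxm] at hlx
        exact ⟨⟨wb, hwb, hlx.symm ▸ rfl⟩, fun hh => hab (hlx ▸ hh : pvLab label wb = pvLab label wa).symm⟩
      · rw [if_neg hxm] at hlx
        refine ⟨⟨x, hx, hlx⟩, ?_⟩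
        intro hla
        exact hxm ((hamem x).mpr ⟨hx, hlx.trans hla⟩)
  · intro l m hm
    rw [hmod, PySem.Dict.get?_insert] at hm
    by_cases hlb : l = pvLab label wb
    · rw [if_pos hlb] at hm
      obtain rfl : mb ++ ma = m := by injection hm
      have hdisj : mb.Disjoint ma := by
        intro x hxb hxa
        exact hab ((((hamem x).mp hxa).2.symm).trans ((hbmem x).mp hxb).2)
      refine ⟨hbnd.append hand hdisj, ?_⟩
      intro x
      rw [List.mem_append, hbmem, hamem, hlb, hlab']
      constructor
      · rintro (⟨hx, hlx⟩ | ⟨hx, hlx⟩)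
        · refine ⟨hx, ?_⟩
          rw [if_neg (fun hh => hab ((((hamem x).mp hh).2.symm).trans hlx))]
          exact hlx
        · exact ⟨hx, by rw [if_pos ((hamem x).mpr ⟨hx, hlx⟩)]⟩
      · rintro ⟨hx, hlx⟩
        by_cases hxm : x ∈ ma
        · exact Or.inr ⟨hx, ((hamem x).mp hxm).2⟩
        · rw [if_neg hxm] at hlx
          exact Or.inl ⟨hx, hlx⟩
    · rw [if_neg hlb, pvGet?_erase] at hm
      by_cases hla : l = pvLab label wa
      · rw [if_pos hla] at hm
        exact absurd hm (by simp)
      · rw [if_neg hla] at hm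
        obtain ⟨hnd, hmm⟩ := h7 l m hm
        refine ⟨hnd, ?_⟩
        intro x
        rw [hmm, hlab']
        constructor
        · rintro ⟨hx, hlx⟩
          refine ⟨hx, ?_⟩
          rw [if_neg (fun hh => hla (hlx ▸ ((hamem x).mp hh).2 ▸ rfl))]
          exact hlx
        · rintro ⟨hx, hlx⟩
          by_cases hxm : x ∈ ma
          · rw [if_pos hxm] at hlx
            exact absurd hlx.symm hlb
          · rw [if_neg hxm] at hlx
            exact ⟨hx, hlx⟩

lemma pvUnion_spec {K : Finset (Int × Int)} {R : Int × Int → Int × Int → Prop}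
    {label : PySem.Dict (Int × Int) (Int × Int)}
    {members : PySem.Dict (Int × Int) (List (Int × Int))}
    (h : pvLSt K R label members)
    (hsym : ∀ x y, R x y → R y x) (htrans : ∀ x y z, R x y → R y z → R x z)
    {c nb : Int × Int} (hc : c ∈ K) (hnb : nb ∈ K) :
    pvLSt K (fun x y => R x y ∨ (R x c ∧ R nb y) ∨ (R x nb ∧ R c y))
      (pvUnion (label, members) c nb).1 (pvUnion (label, members) c nb).2 := by
  obtain ⟨lnb, hlnb⟩ : ∃ v, label.get? nb = some v := by
    cases hg : label.get? nb with
    | none =>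
        rw [PySem.Dict.get?_eq_none_iff_not_mem_keys] at hg
        exact absurd ((h.2.1 nb).mpr hnb) hg
    | some v => exact ⟨v, rfl⟩
  have hlabnb : pvLab label nb = lnb := by rw [pvLab, hlnb]; rfl
  have hU0 : pvUnion (label, members) c nb
      = (if lnb = pvLab label c then (label, members)
         else
           let p := if (PySem.Dict.getD members (pvLab label c) []).length >
                      (PySem.Dict.getD members lnb []).length
                    then (lnb, pvLab label c) else (pvLab label c, lnb)
           (((PySem.Dict.getD members p.1 []).foldl
               (fun L x => PySem.Dict.insert L x p.2) label),
            PySem.Dict.modify (PySem.Dict.erase members p.1) p.2 []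
              (· ++ PySem.Dict.getD members p.1 []))) := by
    simp only [pvUnion, hlnb, pvLab]
  by_cases heq : lnb = pvLab label c
  · rw [hU0, if_pos heq]
    have hRnbc : R nb c := (h.2.2.2.1 nb hnb c hc).mp (by rw [hlabnb, heq])
    refine pvLSt_congr h ?_
    intro x hx y hy
    constructor
    · exact Or.inl
    · rintro (hr | ⟨hxc, hnby⟩ | ⟨hxnb, hcy⟩)
      · exact hr
      · exact htrans x c y hxc (htrans c nb y (hsym nb c hRnbc) hnby)
      · exact htrans x nb y hxnb (htrans nb c y hRnbc hcy)
  · rw [hU0, if_neg heq]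
    by_cases hlen : (PySem.Dict.getD members (pvLab label c) []).length >
        (PySem.Dict.getD members lnb []).length
    · rw [if_pos hlen]
      have hnR : ¬ R nb c := fun hr => heq (hlabnb ▸ (h.2.2.2.1 nb hnb c hc).mpr hr)
      have hres := pvMergeAux h hsym htrans hnb hc hnR
      rw [hlabnb] at hres
      refine pvLSt_congr hres ?_
      intro x hx y hy
      constructor
      · rintro (hr | ⟨hxnb, hcy⟩ | ⟨hxc, hnby⟩)
        · exact Or.inl hr
        · exact Or.inr (Or.inr ⟨hxnb, hcy⟩)
        · exact Or.inr (Or.inl ⟨hxc, hnby⟩)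
      · rintro (hr | ⟨hxc, hnby⟩ | ⟨hxnb, hcy⟩)
        · exact Or.inl hr
        · exact Or.inr (Or.inr ⟨hxc, hnby⟩)
        · exact Or.inr (Or.inl ⟨hxnb, hcy⟩)
    · rw [if_neg hlen]
      have hnR : ¬ R c nb :=
        fun hr => heq ((hlabnb ▸ (h.2.2.2.1 c hc nb hnb).mpr hr) : pvLab label c = lnb).symm
      have hres := pvMergeAux h hsym htrans hc hnb hnR
      rw [hlabnb] at hres
      exact hres

def pvInGrid (g0 : List (List Int)) (d : Int × Int) : Prop :=
  0 ≤ d.1 ∧ d.1 < (g0.length : Int) ∧ 0 ≤ d.2 ∧ d.2 < ((g0.headD []).length : Int)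

-- row-major order on cells
def pvRmLt (d c : Int × Int) : Prop := d.1 < c.1 ∨ (d.1 = c.1 ∧ d.2 < c.2)

def pvStepB (g0 : List (List Int))
    (st : Int × PySem.Dict (Int × Int) (Int × Int) × PySem.Dict (Int × Int) (List (Int × Int)))
    (c : Int × Int) :
    Int × PySem.Dict (Int × Int) (Int × Int) × PySem.Dict (Int × Int) (List (Int × Int)) :=
  let v := pvGGet g0 c.1 c.2
  if v ≤ 0 then st
  else
    let total := st.1 + v
    let label := PySem.Dict.insert st.2.1 c c
    let members := PySem.Dict.insert st.2.2 c [c]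
    let lm := [(c.1 - 1, c.2), (c.1, c.2 - 1)].foldl (fun lm nb => pvUnion lm c nb)
      (label, members)
    (total, lm)

def pvInvB (g0 : List (List Int)) (done : Finset (Int × Int))
    (st : Int × PySem.Dict (Int × Int) (Int × Int) × PySem.Dict (Int × Int) (List (Int × Int))) :
    Prop :=
  st.1 = (pvP g0 ∩ done).sum (pvVal g0) ∧
  pvLSt (pvP g0 ∩ done) (pvRIn g0 done) st.2.1 st.2.2

lemma pvUnion_keep {K' : Finset (Int × Int)} {R : Int × Int → Int × Int → Prop}
    {lm : PySem.Dict (Int × Int) (Int × Int) × PySem.Dict (Int × Int) (List (Int × Int))}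
    (h : pvLSt K' R lm.1 lm.2) {c nb : Int × Int} (hnb : nb ∉ K') :
    pvUnion lm c nb = lm := by
  have hkeys : lm.1.get? nb = none :=
    (PySem.Dict.get?_eq_none_iff_not_mem_keys _ _).mpr (fun hk => hnb ((h.2.1 nb).mp hk))
  simp only [pvUnion, hkeys]

lemma pvUnion_edge {g0 : List (List Int)} {done K' : Finset (Int × Int)} {c : Int × Int}
    (hcd : c ∉ done) {nbs : List (Int × Int)}
    {label : PySem.Dict (Int × Int) (Int × Int)}
    {members : PySem.Dict (Int × Int) (List (Int × Int))}
    (h : pvLSt K' (pvF g0 done c nbs) label members) (hc : c ∈ K') {nb : Int × Int}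
    (hnb : nb ∈ K') :
    pvLSt K' (pvF g0 done c (nbs ++ [nb])) (pvUnion (label, members) c nb).1
      (pvUnion (label, members) c nb).2 := by
  refine pvLSt_congr (pvUnion_spec h (fun x y hxy => pvF_symm g0 hxy)
    (fun x y z h1 h2 => pvF_trans g0 hcd h1 h2) hc hnb) ?_
  intro x _ y _
  exact pvJoin_F g0 hcd nbs nb x y

lemma pvStepB_inv (g0 : List (List Int)) (done : Finset (Int × Int))
    (st : Int × PySem.Dict (Int × Int) (Int × Int) × PySem.Dict (Int × Int) (List (Int × Int)))
    (c : Int × Int) (hgrid : pvInGrid g0 c)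
    (hlt : ∀ d ∈ done, pvRmLt d c) (hcomp : ∀ d, pvInGrid g0 d → pvRmLt d c → d ∈ done)
    (h : pvInvB g0 done st) : pvInvB g0 (insert c done) (pvStepB g0 st c) := by
  obtain ⟨htot, hL⟩ := h
  have hcd : c ∉ done := by
    intro hcd
    have := hlt c hcd
    rcases this with h' | h' <;> omega
  by_cases hv : pvGGet g0 c.1 c.2 ≤ 0
  · -- c is not positive: the state does not change, nor does the processed positive set
    have hcP : c ∉ pvP g0 := by
      rw [pv_mem_pvP]
      rintro ⟨_, _, _, _, h5⟩
      rw [pvVal] at h5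
      omega
    have hint : pvP g0 ∩ insert c done = pvP g0 ∩ done := by
      ext x
      simp only [Finset.mem_inter, Finset.mem_insert]
      constructor
      · rintro ⟨h1, h2 | h2⟩
        · subst h2; exact absurd h1 hcP
        · exact ⟨h1, h2⟩
      · rintro ⟨h1, h2⟩
        exact ⟨h1, Or.inr h2⟩
    have hnp : ¬ pvPos g0 c := fun hp => hcP ((pv_mem_pvP g0 c).mpr hp)
    rw [pvStepB]
    rw [if_pos hv]
    refine ⟨by rw [htot, hint], ?_⟩
    rw [hint]
    exact pvLSt_congr hL (fun x _ y _ => (pvRIn_insert_notPos g0 hnp x y).symm)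
  · -- c is a new positive cell: insert it and union with its up/left neighbours
    have hpos : pvPos g0 c := ⟨hgrid.1, hgrid.2.1, hgrid.2.2.1, hgrid.2.2.2, by rw [pvVal]; omega⟩
    have hcP : c ∈ pvP g0 := (pv_mem_pvP g0 c).mpr hpos
    have hKins : pvP g0 ∩ insert c done = insert c (pvP g0 ∩ done) :=
      pvInter_insert_pos g0 done hcP
    have hcK : c ∉ pvP g0 ∩ done := fun hk => hcd (Finset.mem_inter.mp hk).2
    have hdone_ne : ∀ y ∈ pvP g0 ∩ done, y ≠ c :=
      fun y hy he => hcd (he ▸ (Finset.mem_inter.mp hy).2)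
    have h₁ := pvLSt_insert hL hcK (Relation.ReflTransGen.refl)
      (fun y hy hr => (hdone_ne y hy) (pvRIn_start g0 hcd hr))
      (fun y hy hr => (hdone_ne y hy) (pvRIn_end g0 hcd hr))
    have hcK' : c ∈ insert c (pvP g0 ∩ done) := Finset.mem_insert_self _ _
    have h₂ : pvLSt (insert c (pvP g0 ∩ done)) (pvF g0 done c [])
        (PySem.Dict.insert st.2.1 c c) (PySem.Dict.insert st.2.2 c [c]) :=
      pvLSt_congr h₁ (fun x _ y _ => (pvF_nil g0 done c x y).symm)
    -- the two candidate neighbours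
    have hne_up : ((c.1 - 1, c.2) : Int × Int) ≠ c := by
      intro he
      have h' : c.1 - 1 = c.1 := congrArg Prod.fst he
      omega
    have hne_left : ((c.1, c.2 - 1) : Int × Int) ≠ c := by
      intro he
      have h' : c.2 - 1 = c.2 := congrArg Prod.snd he
      omega
    have hmemK' : ∀ nb : Int × Int, nb ≠ c → pvRmLt nb c →
        (nb ∈ insert c (pvP g0 ∩ done) ↔ pvPos g0 nb) := by
      intro nb hne hrm
      rw [Finset.mem_insert]
      constructor
      · rintro (h' | h')
        · exact absurd h' hne
        · exact (pv_mem_pvP g0 nb).mp (Finset.mem_inter.mp h').1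
      · intro hp
        refine Or.inr (Finset.mem_inter.mpr ⟨(pv_mem_pvP g0 nb).mpr hp, ?_⟩)
        exact hcomp nb ⟨hp.1, hp.2.1, hp.2.2.1, hp.2.2.2.1⟩ hrm
    have hup_iff := hmemK' (c.1 - 1, c.2) hne_up (Or.inl (by omega))
    have hleft_iff := hmemK' (c.1, c.2 - 1) hne_left (Or.inr ⟨rfl, by omega⟩)
    -- the final label/members state carries pvF over the processed neighbour list nbs
    have hmain : ∃ nbs : List (Int × Int),
        (∀ u ∈ nbs, pvAdj g0 c u ∧ u ∈ done) ∧
        (∀ u, pvAdj g0 u c → u ∈ done → u ∈ nbs) ∧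
        pvLSt (insert c (pvP g0 ∩ done)) (pvF g0 done c nbs)
          ([(c.1 - 1, c.2), (c.1, c.2 - 1)].foldl (fun lm nb => pvUnion lm c nb)
            (PySem.Dict.insert st.2.1 c c, PySem.Dict.insert st.2.2 c [c])).1
          ([(c.1 - 1, c.2), (c.1, c.2 - 1)].foldl (fun lm nb => pvUnion lm c nb)
            (PySem.Dict.insert st.2.1 c c, PySem.Dict.insert st.2.2 c [c])).2 := by
      have hadj_up : pvPos g0 (c.1 - 1, c.2) → pvAdj g0 c (c.1 - 1, c.2) :=
        fun hp => ⟨hpos, hp, by simp [pvNbrs]⟩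
      have hadj_left : pvPos g0 (c.1, c.2 - 1) → pvAdj g0 c (c.1, c.2 - 1) :=
        fun hp => ⟨hpos, hp, by simp [pvNbrs]⟩
      have hsub0 : ∀ u, pvAdj g0 u c → u ∈ done → u = (c.1 - 1, c.2) ∨ u = (c.1, c.2 - 1) := by
        intro u hadj hud
        have hrm := hlt u hud
        have hu : u ∈ pvNbrs c := (pvNbrs_symm c u).mpr hadj.2.2
        simp only [pvNbrs, List.mem_cons, List.not_mem_nil, or_false] at hu
        rcases hu with hu | hu | hu | hu
        · exact Or.inl hu
        · rcases hrm with h' | h' <;> rw [hu] at h' <;> simp at h'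
        · rcases hrm with h' | h' <;> rw [hu] at h' <;> simp at h'
        · exact Or.inr hu
      have hdone_of_pos : ∀ nb : Int × Int, nb ≠ c → pvRmLt nb c → pvPos g0 nb → nb ∈ done :=
        fun nb hne hrm hp => hcomp nb ⟨hp.1, hp.2.1, hp.2.2.1, hp.2.2.2.1⟩ hrm
      rw [List.foldl_cons, List.foldl_cons, List.foldl_nil]
      by_cases e1 : pvPos g0 (c.1 - 1, c.2)
      · have hU1 := pvUnion_edge hcd h₂ hcK' (hup_iff.mpr e1)
        by_cases e2 : pvPos g0 (c.1, c.2 - 1)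
        · have hU2 := pvUnion_edge hcd hU1 hcK' (hleft_iff.mpr e2)
          refine ⟨[(c.1 - 1, c.2), (c.1, c.2 - 1)], ?_, ?_, hU2⟩
          · intro u hu
            rcases List.mem_cons.mp hu with hu | hu
            · subst hu
              exact ⟨hadj_up e1, hdone_of_pos _ hne_up (Or.inl (by omega)) e1⟩
            · rw [List.mem_singleton] at hu
              subst hu
              exact ⟨hadj_left e2, hdone_of_pos _ hne_left (Or.inr ⟨rfl, by omega⟩) e2⟩
          · intro u hadj hud
            rcases hsub0 u hadj hud with h' | h' <;> subst h' <;> simp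
        · have hskip : pvUnion (pvUnion
              (PySem.Dict.insert st.2.1 c c, PySem.Dict.insert st.2.2 c [c]) c (c.1 - 1, c.2))
              c (c.1, c.2 - 1) = pvUnion
              (PySem.Dict.insert st.2.1 c c, PySem.Dict.insert st.2.2 c [c]) c (c.1 - 1, c.2) :=
            pvUnion_keep hU1 (fun hk => e2 (hleft_iff.mp hk))
          rw [hskip]
          refine ⟨[(c.1 - 1, c.2)], ?_, ?_, hU1⟩
          · intro u hu
            rw [List.mem_singleton] at hu
            subst hu
            exact ⟨hadj_up e1, hdone_of_pos _ hne_up (Or.inl (by omega)) e1⟩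
          · intro u hadj hud
            rcases hsub0 u hadj hud with h' | h' <;> subst h'
            · simp
            · exact absurd hadj.1 e2
      · have hskip1 : pvUnion
            (PySem.Dict.insert st.2.1 c c, PySem.Dict.insert st.2.2 c [c]) c (c.1 - 1, c.2)
            = (PySem.Dict.insert st.2.1 c c, PySem.Dict.insert st.2.2 c [c]) :=
          pvUnion_keep h₂ (fun hk => e1 (hup_iff.mp hk))
        rw [hskip1]
        by_cases e2 : pvPos g0 (c.1, c.2 - 1)
        · have hU2 := pvUnion_edge hcd h₂ hcK' (hleft_iff.mpr e2)
          refine ⟨[(c.1, c.2 - 1)], ?_, ?_, hU2⟩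
          · intro u hu
            rw [List.mem_singleton] at hu
            subst hu
            exact ⟨hadj_left e2, hdone_of_pos _ hne_left (Or.inr ⟨rfl, by omega⟩) e2⟩
          · intro u hadj hud
            rcases hsub0 u hadj hud with h' | h' <;> subst h'
            · exact absurd hadj.1 e1
            · simp
        · have hskip2 : pvUnion
              (PySem.Dict.insert st.2.1 c c, PySem.Dict.insert st.2.2 c [c]) c (c.1, c.2 - 1)
              = (PySem.Dict.insert st.2.1 c c, PySem.Dict.insert st.2.2 c [c]) :=
            pvUnion_keep h₂ (fun hk => e2 (hleft_iff.mp hk))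
          rw [hskip2]
          refine ⟨[], ?_, ?_, h₂⟩
          · intro u hu
            exact absurd hu (List.not_mem_nil)
          · intro u hadj hud
            rcases hsub0 u hadj hud with h' | h' <;> subst h'
            · exact absurd hadj.1 e1
            · exact absurd hadj.1 e2
    obtain ⟨nbs, hnbs, hsub, hfin⟩ := hmain
    have hiff := pvF_insert_iff g0 hpos hcd nbs hnbs hsub
    rw [pvStepB, if_neg hv]
    refine ⟨?_, ?_⟩
    · show st.1 + pvGGet g0 c.1 c.2 = _
      rw [htot, hKins, Finset.sum_insert hcK]
      have : pvGGet g0 c.1 c.2 = pvVal g0 c := rfl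
      rw [this]
      ring
    · show pvLSt (pvP g0 ∩ insert c done) (pvRIn g0 (insert c done)) _ _
      rw [hKins]
      exact pvLSt_congr hfin (fun x _ y _ => (hiff x y).symm)

def pvCellsI (g0 : List (List Int)) : List (Int × Int) :=
  (List.range g0.length).flatMap
    (fun i : Nat => (List.range (g0.headD []).length).map
      (fun j : Nat => ((i : Int), (j : Int))))

lemma pvCellsI_mem (g0 : List (List Int)) (x : Int × Int) :
    x ∈ pvCellsI g0 ↔ pvInGrid g0 x := by
  simp only [pvCellsI, List.mem_flatMap, List.mem_map, List.mem_range]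
  constructor
  · rintro ⟨i, hi, j, hj, rfl⟩
    exact ⟨Int.natCast_nonneg i,
      by show (i : Int) < (g0.length : Int); exact_mod_cast hi,
      Int.natCast_nonneg j,
      by show (j : Int) < ((g0.headD []).length : Int); exact_mod_cast hj⟩
  · rintro ⟨h1, h2, h3, h4⟩
    refine ⟨x.1.toNat, by omega, x.2.toNat, by omega, ?_⟩
    rw [Prod.ext_iff]
    constructor <;> simp <;> omega

lemma pvCellsI_pairwise (g0 : List (List Int)) : (pvCellsI g0).Pairwise pvRmLt := by
  rw [pvCellsI]
  have hrow : ∀ i : Nat,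
      ((List.range (g0.headD []).length).map
        (fun j : Nat => ((i : Int), (j : Int)))).Pairwise pvRmLt := by
    intro i
    rw [List.pairwise_map]
    refine List.Pairwise.imp ?_ (List.pairwise_lt_range)
    intro a b hab
    exact Or.inr ⟨rfl, by show (a : Int) < (b : Int); exact_mod_cast hab⟩
  have haux : ∀ is : List Nat, is.Pairwise (· < ·) →
      (is.flatMap (fun i : Nat => (List.range (g0.headD []).length).map
        (fun j : Nat => ((i : Int), (j : Int))))).Pairwise pvRmLt := by
    intro is
    induction is with
    | nil => intro _; simp
    | cons i is' ih =>
        intro hp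
        rw [List.pairwise_cons] at hp
        rw [List.flatMap_cons, List.pairwise_append]
        refine ⟨hrow i, ih hp.2, ?_⟩
        intro x hx y hy
        obtain ⟨jx, _, rfl⟩ := List.mem_map.mp hx
        obtain ⟨i', hi', jy, _, rfl⟩ := by
          simpa only [List.mem_flatMap, List.mem_map] using hy
        exact Or.inl (by show (i : Int) < (i' : Int); exact_mod_cast hp.1 i' hi')
  exact haux (List.range g0.length) (List.pairwise_lt_range)

lemma pvRmLt_asymm {d c : Int × Int} (h1 : pvRmLt d c) (h2 : pvRmLt c d) : False := by
  rcases h1 with h1 | h1 <;> rcases h2 with h2 | h2 <;> omega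

lemma pvFoldB (g0 : List (List Int)) :
    ∀ (rest done : List (Int × Int))
      (st : Int × PySem.Dict (Int × Int) (Int × Int) × PySem.Dict (Int × Int) (List (Int × Int))),
      pvCellsI g0 = done ++ rest → pvInvB g0 done.toFinset st →
      pvInvB g0 (done.toFinset ∪ rest.toFinset) (rest.foldl (pvStepB g0) st) := by
  intro rest
  induction rest with
  | nil =>
      intro done st _ h
      simpa using h
  | cons c rest' ih =>
      intro done st heq h
      have hPW := pvCellsI_pairwise g0
      rw [heq] at hPW
      obtain ⟨_, hP2, hcross⟩ := List.pairwise_append.mp hPW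
      obtain ⟨hhead, _⟩ := List.pairwise_cons.mp hP2
      have hgrid : pvInGrid g0 c := by
        rw [← pvCellsI_mem, heq]
        exact List.mem_append_right _ List.mem_cons_self
      have hlt : ∀ d ∈ done.toFinset, pvRmLt d c :=
        fun d hd => hcross d (List.mem_toFinset.mp hd) c List.mem_cons_self
      have hcomp : ∀ d, pvInGrid g0 d → pvRmLt d c → d ∈ done.toFinset := by
        intro d hdg hrm
        have hdmem : d ∈ done ++ c :: rest' := by
          rw [← heq, pvCellsI_mem]
          exact hdg
        rcases List.mem_append.mp hdmem with hd | hd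
        · exact List.mem_toFinset.mpr hd
        · rcases List.mem_cons.mp hd with rfl | hd
          · exact absurd hrm (by rintro (h' | h') <;> omega)
          · exact absurd hrm (fun hrm => pvRmLt_asymm hrm (hhead d hd))
      have hstep := pvStepB_inv g0 done.toFinset st c hgrid hlt hcomp h
      have hset1 : (done ++ [c]).toFinset = insert c done.toFinset := by
        ext x; simp
      have h' := ih (done ++ [c]) (pvStepB g0 st c)
        (by rw [heq, List.append_assoc]; rfl)
        (by rw [hset1]; exact hstep)
      have hset2 : (done ++ [c]).toFinset ∪ rest'.toFinset
          = done.toFinset ∪ (c :: rest').toFinset := by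
        ext x; simp
      rw [List.foldl_cons]
      rwa [hset2] at h'

lemma pvAltB (g0 : List (List Int)) : find_dummy_alt g0
    = ((((pvCellsI g0).foldl (pvStepB g0) (0, PySem.Dict.empty, PySem.Dict.empty)).1,
        PySem.List.maxD ((PySem.Dict.values ((pvCellsI g0).foldl (pvStepB g0)
          (0, PySem.Dict.empty, PySem.Dict.empty)).2.2).map (fun m => PySem.List.len m))
          (fun x => x) 0)) := by
  have hcols : (if PySem.List.len g0 = 0 then 0 else
      PySem.List.len ((PySem.List.pyGet? g0 0).getD [])) = (((g0.headD []).length : Nat) : Int) := by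
    cases g0 with
    | nil => simp [PySem.List.len]
    | cons r t =>
        rw [if_neg (by simp only [PySem.List.len, List.length_cons]; omega)]
        simp [PySem.List.len]
  simp only [find_dummy_alt]
  rw [hcols, PySem.List.len_eq]
  simp only [PySem.List.pyRange_zero_natCast, List.foldl_map]
  rw [pvCellsI, List.foldl_flatMap]
  simp only [List.foldl_map]
  rfl

-- membership in a component
lemma pv_mem_comp_iff (g0 : List (List Int)) (s x : Int × Int) :
    x ∈ pvComp g0 s ↔ x ∈ pvP g0 ∧ pvReach g0 s x := by
  simp only [pvComp, Finset.mem_filter]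

lemma pvExtract (g0 : List (List Int))
    {label : PySem.Dict (Int × Int) (Int × Int)}
    {members : PySem.Dict (Int × Int) (List (Int × Int))}
    (h : pvLSt (pvP g0) (pvReach g0) label members) :
    PySem.List.maxD ((PySem.Dict.values members).map (fun m => PySem.List.len m)) (fun x => x) 0
      = (((pvP g0).sup (fun c => (pvComp g0 c).card) : Nat) : Int) := by
  obtain ⟨h1, h2, h3, h4, h5, h6, h7⟩ := h
  have hentry : ∀ l m, members.get? l = some m → ∀ x, x ∈ pvP g0 → pvLab label x = l →
      PySem.List.len m = ((pvComp g0 x).card : Int) := by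
    intro l m hget x hx hlx
    obtain ⟨hnd, hmm⟩ := h7 l m hget
    have hset : m.toFinset = pvComp g0 x := by
      ext y
      rw [List.mem_toFinset, hmm, pv_mem_comp_iff]
      constructor
      · rintro ⟨hy, hly⟩
        exact ⟨hy, pvReach_symm g0 ((h4 y hy x hx).mp (hly.trans hlx.symm))⟩
      · rintro ⟨hy, hry⟩
        exact ⟨hy, ((h4 y hy x hx).mpr (pvReach_symm g0 hry)).trans hlx⟩
    rw [PySem.List.len_eq, ← hset, List.toFinset_card_of_nodup hnd]
  have hval : ∀ e ∈ (PySem.Dict.values members).map (fun m => PySem.List.len m),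
      ∃ x ∈ pvP g0, e = ((pvComp g0 x).card : Int) := by
    intro e he
    obtain ⟨m, hm, rfl⟩ := List.mem_map.mp he
    obtain ⟨p, hp, hpe⟩ := List.mem_map.mp hm
    have hget : members.get? p.1 = some m := by
      rw [← hpe]
      exact PySem.Dict.get?_of_mem_items _ (by rw [← Prod.mk.eta (p := p)] at hp; exact hp) h5
    have hkeys : p.1 ∈ members.keys := List.mem_map.mpr ⟨p, hp, rfl⟩
    obtain ⟨x, hx, hlx⟩ := (h6 p.1).mp hkeys
    exact ⟨x, hx, hentry p.1 m hget x hx hlx⟩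
  rcases Finset.eq_empty_or_nonempty (pvP g0) with hP | hP
  · have hkeysnil : members.keys = [] := by
      rw [List.eq_nil_iff_forall_not_mem]
      intro l hl
      obtain ⟨x, hx, _⟩ := (h6 l).mp hl
      rw [hP] at hx
      exact absurd hx (Finset.notMem_empty x)
    have hitems : members.items = [] := by
      have := hkeysnil
      rw [PySem.Dict.keys] at this
      exact List.map_eq_nil_iff.mp this
    rw [PySem.Dict.values, hitems, hP]
    simp [PySem.List.maxD, PySem.List.max?]
  · obtain ⟨xm, hxm, hsup⟩ := Finset.exists_mem_eq_sup (pvP g0) hP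
      (fun c => (pvComp g0 c).card)
    have hlkeys : pvLab label xm ∈ members.keys := (h6 _).mpr ⟨xm, hxm, rfl⟩
    obtain ⟨m0, hget0⟩ : ∃ m, members.get? (pvLab label xm) = some m := by
      cases hg : members.get? (pvLab label xm) with
      | none =>
          rw [PySem.Dict.get?_eq_none_iff_not_mem_keys] at hg
          exact absurd hlkeys hg
      | some m => exact ⟨m, rfl⟩
    have hm0 : PySem.List.len m0 = ((pvComp g0 xm).card : Int) :=
      hentry _ m0 hget0 xm hxm rfl
    have hm0mem : PySem.List.len m0
        ∈ (PySem.Dict.values members).map (fun m => PySem.List.len m) := by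
      refine List.mem_map.mpr ⟨m0, ?_, rfl⟩
      exact List.mem_map.mpr ⟨(pvLab label xm, m0),
        PySem.Dict.mem_items_of_get?_eq_some _ hget0, rfl⟩
    cases hmax : PySem.List.max? ((PySem.Dict.values members).map (fun m => PySem.List.len m))
        (fun x => x) with
    | none =>
        rw [PySem.List.max?_eq_none_iff] at hmax
        rw [hmax] at hm0mem
        exact absurd hm0mem (List.not_mem_nil)
    | some mx =>
        have hmx1 : mx ≤ (((pvP g0).sup (fun c => (pvComp g0 c).card) : Nat) : Int) := by
          obtain ⟨x, hx, hxe⟩ := hval mx (PySem.List.max?_mem hmax)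
          rw [hxe]
          exact_mod_cast Finset.le_sup (f := fun c => (pvComp g0 c).card) hx
        have hmx2 : (((pvP g0).sup (fun c => (pvComp g0 c).card) : Nat) : Int) ≤ mx := by
          have := PySem.List.max?_isMax hmax _ hm0mem
          rw [hm0, ← hsup] at this
          exact this
        rw [PySem.List.maxD, hmax]
        exact le_antisymm hmx1 hmx2

lemma pv_mainB (g0 : List (List Int)) : find_dummy_alt g0 = pvTarget g0 := by
  rw [pvAltB]
  have h0 : pvInvB g0 (([] : List (Int × Int)).toFinset)
      (0, PySem.Dict.empty, PySem.Dict.empty) := by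
    refine ⟨by simp, ?_, ?_, ?_, ?_, ?_, ?_, ?_⟩
    · simp [PySem.Dict.keys_empty]
    · intro x
      simp [PySem.Dict.keys_empty]
    · intro x hx
      simp at hx
    · intro x hx
      simp at hx
    · simp [PySem.Dict.keys_empty]
    · intro l
      simp [PySem.Dict.keys_empty]
    · intro l m hm
      rw [PySem.Dict.get?_empty] at hm
      exact absurd hm (by simp)
  have hfold := pvFoldB g0 (pvCellsI g0) [] (0, PySem.Dict.empty, PySem.Dict.empty) (by simp) h0
  simp only [List.toFinset_nil, Finset.empty_union] at hfold
  obtain ⟨htot, hLf⟩ := hfold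
  have hfullmem : ∀ u, pvPos g0 u → u ∈ (pvCellsI g0).toFinset := by
    intro u hu
    rw [List.mem_toFinset, pvCellsI_mem]
    exact ⟨hu.1, hu.2.1, hu.2.2.1, hu.2.2.2.1⟩
  have hPfull : pvP g0 ∩ (pvCellsI g0).toFinset = pvP g0 :=
    Finset.inter_eq_left.mpr (fun x hx => hfullmem x ((pv_mem_pvP g0 x).mp hx))
  rw [hPfull] at htot hLf
  have hLs : pvLSt (pvP g0) (pvReach g0)
      ((pvCellsI g0).foldl (pvStepB g0) (0, PySem.Dict.empty, PySem.Dict.empty)).2.1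
      ((pvCellsI g0).foldl (pvStepB g0) (0, PySem.Dict.empty, PySem.Dict.empty)).2.2 :=
    pvLSt_congr hLf (fun x _ y _ => pvRIn_full g0 hfullmem x y)
  rw [pvTarget]
  refine Prod.ext ?_ ?_ <;> dsimp
  · exact htot
  · exact pvExtract g0 hLs

-- ===== VERDICT (by name: the statement is the Claim_ definition above) =====
theorem find_dummy_spec : Claim_equal_find_dummy := by
  intro MAP _ _
  unfold Spec_find_dummy
  rw [pv_mainA, pv_mainB]
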